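-- pv_equiv track=rewrite | github.com/ahyun39/CodingTest | 백준/Silver/2468. 안전 영역/안전 영역.py | raining
-- ===== SOURCE A (Python) =====
-- from collections import deque
--
-- def bfs(x, y, n, visited, graph):
--     q = deque()
--     q.append((x, y))
--     while q:
--         x, y = q.popleft()
--         visited[x][y] = True
--         for dx, dy in [(-1,0),(0,1),(1,0),(0,-1)]:
--             nx, ny = x + dx, y + dy
--             if 0 <= nx < n and 0 <= ny < n and not visited[nx][ny] and graph[nx][ny] == 0:
--                 visited[nx][ny] = True
--                 q.append((nx, ny))
--     return
--
-- def raining(mm, n, graph):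
--     region_status = [[1 if graph[i][j] <= mm else 0 for j in range(n)] for i in range(n)]
--     cnt = 0
--     visited = [[False] * n for _ in range(n)]
--
--     for i in range(n):
--         for j in range(n):
--             if region_status[i][j] == 0 and not visited[i][j]:
--                 cnt += 1
--                 bfs(i, j, n, visited, region_status)
--     return cnt
-- ===== SOURCE B (Python) =====
-- # Min-label propagation: give every safe cell its own flat id, repeatedly let each
-- # safe cell take the minimum label among itself and its safe 4-neighbours until a
-- # fixpoint; the safe cells whose label is still their own id are exactly the
-- # row-major-first cells of each connected safe region, so counting them gives the
-- # number of safe regions.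
-- def raining(mm, n, graph):
--     safe = [graph[i][j] > mm for i in range(n) for j in range(n)]
--     N = len(safe)
--     label = list(range(N))
--     changed = True
--     while changed:
--         changed = False
--         new = []
--         for p in range(N):
--             best = label[p]
--             if safe[p]:
--                 i, j = p // n, p % n
--                 if i > 0 and safe[p - n] and label[p - n] < best:
--                     best = label[p - n]
--                 if i < n - 1 and safe[p + n] and label[p + n] < best:
--                     best = label[p + n]
--                 if j > 0 and safe[p - 1] and label[p - 1] < best:
--                     best = label[p - 1]
--                 if j < n - 1 and safe[p + 1] and label[p + 1] < best:
--                     best = label[p + 1]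
--             if best != label[p]:
--                 changed = True
--             new.append(best)
--         label = new
--     return sum(1 for p in range(N) if safe[p] and label[p] == p)
-- ===== Notes on version B (the rewrite author's own statement) =====
-- stated objective: alternative
-- what changed: Replaces the visited-matrix + per-seed BFS flood fill by a min-label propagation over a flat array: every safe cell starts with its own row-major id, repeatedly takes the minimum label among itself and its safe 4-neighbours until a fixpoint, and the answer is the number of safe cells that still hold their own id (one per connected region).
import Mathlib
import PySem

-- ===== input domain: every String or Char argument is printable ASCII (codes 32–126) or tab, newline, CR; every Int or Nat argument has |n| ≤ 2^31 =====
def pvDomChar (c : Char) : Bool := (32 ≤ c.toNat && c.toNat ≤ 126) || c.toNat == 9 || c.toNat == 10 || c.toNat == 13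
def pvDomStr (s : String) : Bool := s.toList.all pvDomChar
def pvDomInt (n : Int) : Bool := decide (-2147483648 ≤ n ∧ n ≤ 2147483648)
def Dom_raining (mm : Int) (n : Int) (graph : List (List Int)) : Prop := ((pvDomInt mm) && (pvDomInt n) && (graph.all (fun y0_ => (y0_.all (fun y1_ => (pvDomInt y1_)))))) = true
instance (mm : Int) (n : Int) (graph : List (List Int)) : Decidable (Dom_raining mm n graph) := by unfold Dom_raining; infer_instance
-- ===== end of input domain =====

-- B replaces A's visited-matrix + per-seed BFS flood fill by min-label propagation to a
-- fixpoint over a flat array, counting the safe cells that keep their own row-major id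
-- (one per connected safe region); equal return value on every input admitted by Pre_raining.
-- ===== PORT A =====
def pvGetI (M : List (List Int)) (i j : Nat) : Int := (M.getD i []).getD j 0
def pvGetB (M : List (List Bool)) (i j : Nat) : Bool := (M.getD i []).getD j false
def pvSetB (M : List (List Bool)) (i j : Nat) : List (List Bool) := M.set i ((M.getD i []).set j true)

def pvRegion (mm n : Int) (graph : List (List Int)) : List (List Int) :=
  (List.range n.toNat).map (fun i => (List.range n.toNat).map (fun j =>
    if pvGetI graph i j ≤ mm then (1 : Int) else 0))

def pvDirs : List (Int × Int) := [(-1, 0), (0, 1), (1, 0), (0, -1)]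

def pvTry (n : Int) (region : List (List Int)) (st : List (List Bool) × List (Int × Int))
    (nx ny : Int) : List (List Bool) × List (Int × Int) :=
  if 0 ≤ nx ∧ nx < n ∧ 0 ≤ ny ∧ ny < n ∧ pvGetB st.1 nx.toNat ny.toNat = false ∧
      pvGetI region nx.toNat ny.toNat = 0 then
    (pvSetB st.1 nx.toNat ny.toNat, st.2 ++ [(nx, ny)])
  else st

def pvBfs (n : Int) (region : List (List Int)) :
    Nat → List (Int × Int) → List (List Bool) → List (List Bool)
  | 0, _, visited => visited
  | _ + 1, [], visited => visited
  | f + 1, (x, y) :: rest, visited =>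
    let v1 := pvSetB visited x.toNat y.toNat
    let st := pvDirs.foldl (fun st d => pvTry n region st (x + d.1) (y + d.2)) (v1, rest)
    pvBfs n region f st.2 st.1

def raining (mm : Int) (n : Int) (graph : List (List Int)) : Int :=
  let region := pvRegion mm n graph
  let nn := n.toNat
  let st := (List.range nn).foldl (fun st i =>
    (List.range nn).foldl (fun st j =>
      if pvGetI region i j = 0 ∧ pvGetB st.2 i j = false then
        (st.1 + 1, pvBfs n region (nn * nn + 1) [((i : Int), (j : Int))] st.2)
      else st) st)
    ((0 : Int), List.replicate nn (List.replicate nn false))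
  st.1

-- ===== PORT B =====
def altSafe (mm n : Int) (graph : List (List Int)) : List Bool :=
  (List.range n.toNat).flatMap (fun i => (List.range n.toNat).map (fun j =>
    decide (mm < (graph.getD i []).getD j 0)))

def altBest (nn : Nat) (safe : List Bool) (label : List Nat) (p : Nat) : Nat :=
  let b0 := label.getD p 0
  if safe.getD p false then
    let i := p / nn
    let j := p % nn
    let b1 := if 0 < i ∧ safe.getD (p - nn) false ∧ label.getD (p - nn) 0 < b0 then label.getD (p - nn) 0 else b0
    let b2 := if i < nn - 1 ∧ safe.getD (p + nn) false ∧ label.getD (p + nn) 0 < b1 then label.getD (p + nn) 0 else b1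
    let b3 := if 0 < j ∧ safe.getD (p - 1) false ∧ label.getD (p - 1) 0 < b2 then label.getD (p - 1) 0 else b2
    if j < nn - 1 ∧ safe.getD (p + 1) false ∧ label.getD (p + 1) 0 < b3 then label.getD (p + 1) 0 else b3
  else b0

def altRound (nn : Nat) (safe : List Bool) (label : List Nat) : List Nat × Bool :=
  (List.range safe.length).foldl (fun acc p =>
    let best := altBest nn safe label p
    (acc.1 ++ [best], acc.2 || decide (best ≠ label.getD p 0))) ([], false)

def altLoop (nn : Nat) (safe : List Bool) : Nat → List Nat → List Nat
  | 0, label => label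
  | f + 1, label =>
    let r := altRound nn safe label
    if r.2 then altLoop nn safe f r.1 else r.1

def raining_alt (mm : Int) (n : Int) (graph : List (List Int)) : Int :=
  let safe := altSafe mm n graph
  let N := safe.length
  let label := altLoop n.toNat safe (N + 2) (List.range N)
  ((List.range N).filter (fun p => safe.getD p false && (label.getD p 0 == p))).length



-- ===== PRECONDITION & SPEC =====
-- Pre_raining excludes exactly the inputs on which the Python A raises IndexError:
-- n larger than the number of rows of graph, or one of the first n rows shorter than n.
def Pre_raining (mm : Int) (n : Int) (graph : List (List Int)) : Prop :=
  n.toNat ≤ graph.length ∧ ∀ row ∈ graph.take n.toNat, n.toNat ≤ row.length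

instance (mm : Int) (n : Int) (graph : List (List Int)) : Decidable (Pre_raining mm n graph) := by
  unfold Pre_raining; infer_instance

def pvWitness_raining : Int × Int × List (List Int) := (1, 2, [[0, 3], [3, 0]])

def Spec_raining (mm : Int) (n : Int) (graph : List (List Int)) (out : Int) : Prop := out = raining_alt mm n graph
instance (mm : Int) (n : Int) (graph : List (List Int)) (out : Int) : Decidable (Spec_raining mm n graph out) := by unfold Spec_raining; infer_instance

-- ===== CLAIM (what is proved, stated in full; the proofs are below) =====
def Claim_equal_raining : Prop := ∀ (mm : Int) (n : Int) (graph : List (List Int)), Dom_raining mm n graph → Pre_raining mm n graph → Spec_raining mm n graph (raining mm n graph)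

-- ===== LEMMAS AND PROOFS =====
-- ===== core grid-graph theory, parameterized by grid size nn and safety predicate S =====
def encP (nn : Nat) (a : Nat × Nat) : Nat := a.1 * nn + a.2

def nbrsP (nn : Nat) (S : Nat × Nat → Bool) (a : Nat × Nat) : List (Nat × Nat) :=
  ((if 0 < a.1 then [(a.1 - 1, a.2)] else []) ++ (if a.1 < nn - 1 then [(a.1 + 1, a.2)] else []) ++
   (if 0 < a.2 then [(a.1, a.2 - 1)] else []) ++ (if a.2 < nn - 1 then [(a.1, a.2 + 1)] else [])).filter S

def adjP (nn : Nat) (S : Nat × Nat → Bool) (a b : Nat × Nat) : Bool :=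
  S a && decide (b ∈ nbrsP nn S a)

def reachP (nn : Nat) (S : Nat × Nat → Bool) : Nat → Nat × Nat → Nat × Nat → Bool
  | 0, a, b => decide (a = b)
  | k + 1, a, b => reachP nn S k a b || (S a && (nbrsP nn S a).any (fun r => reachP nn S k r b))

def gridF (nn : Nat) : Finset (Nat × Nat) := Finset.range nn ×ˢ Finset.range nn

def compC (nn : Nat) (S : Nat × Nat → Bool) (c : Nat × Nat) : Finset (Nat × Nat) :=
  (gridF nn).filter (fun q => reachP nn S (nn * nn) c q = true)

def LbP (nn : Nat) (S : Nat × Nat → Bool) : Nat → Nat × Nat → Nat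
  | 0, a => encP nn a
  | k + 1, a => if S a then (nbrsP nn S a).foldl (fun b r => min b (LbP nn S k r)) (LbP nn S k a)
      else LbP nn S k a

-- membership characterization of nbrsP
theorem mem_nbrsP (nn : Nat) (S : Nat × Nat → Bool) (a b : Nat × Nat) :
    b ∈ nbrsP nn S a ↔ S b = true ∧
      ((0 < a.1 ∧ b = (a.1 - 1, a.2)) ∨ (a.1 < nn - 1 ∧ b = (a.1 + 1, a.2)) ∨
       (0 < a.2 ∧ b = (a.1, a.2 - 1)) ∨ (a.2 < nn - 1 ∧ b = (a.1, a.2 + 1))) := by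
  simp only [nbrsP, List.mem_filter, List.mem_append]
  constructor
  · rintro ⟨h, hS⟩
    refine ⟨hS, ?_⟩
    rcases h with ((h | h) | h) | h <;> split_ifs at h with hc <;> simp at h <;> tauto
  · rintro ⟨hS, h⟩
    refine ⟨?_, hS⟩
    rcases h with ⟨hc, rfl⟩ | ⟨hc, rfl⟩ | ⟨hc, rfl⟩ | ⟨hc, rfl⟩ <;> simp [hc]

theorem nbrs_symm (nn : Nat) (S : Nat × Nat → Bool)
    (hS : ∀ a, S a = true → a.1 < nn ∧ a.2 < nn) (a b : Nat × Nat)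
    (ha : S a = true) (h : b ∈ nbrsP nn S a) : a ∈ nbrsP nn S b := by
  rcases (mem_nbrsP nn S a b).1 h with ⟨hb, hcase⟩
  have hab := hS a ha
  rw [mem_nbrsP]
  refine ⟨ha, ?_⟩
  rcases hcase with ⟨hc, rfl⟩ | ⟨hc, rfl⟩ | ⟨hc, rfl⟩ | ⟨hc, rfl⟩
  · right; left
    refine ⟨by omega, by simp [Prod.ext_iff] <;> omega⟩
  · left
    refine ⟨by omega, by simp [Prod.ext_iff] <;> omega⟩
  · right; right; right
    refine ⟨by omega, by simp [Prod.ext_iff] <;> omega⟩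
  · right; right; left
    refine ⟨by omega, by simp [Prod.ext_iff] <;> omega⟩

theorem not_mem_nbrs_self (nn : Nat) (S : Nat × Nat → Bool) (a : Nat × Nat) :
    a ∉ nbrsP nn S a := by
  intro h
  rcases (mem_nbrsP nn S a a).1 h with ⟨-, hcase⟩
  rcases hcase with ⟨hc, he⟩ | ⟨hc, he⟩ | ⟨hc, he⟩ | ⟨hc, he⟩ <;>
    (rw [Prod.ext_iff] at he <;> simp at he <;> omega)

theorem adj_symm (nn : Nat) (S : Nat × Nat → Bool)
    (hS : ∀ a, S a = true → a.1 < nn ∧ a.2 < nn) (a b : Nat × Nat)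
    (h : adjP nn S a b = true) : adjP nn S b a = true := by
  simp only [adjP, Bool.and_eq_true, decide_eq_true_eq] at h ⊢
  exact ⟨((mem_nbrsP nn S a b).1 h.2).1, nbrs_symm nn S hS a b h.1 h.2⟩

-- ===== reach lemmas =====
theorem reach_refl (nn : Nat) (S : Nat × Nat → Bool) (k : Nat) (a : Nat × Nat) :
    reachP nn S k a a = true := by
  induction k with
  | zero => simp [reachP]
  | succ k ih => simp [reachP, ih]

theorem reach_succ (nn : Nat) (S : Nat × Nat → Bool) (k : Nat) (a b : Nat × Nat)
    (h : reachP nn S k a b = true) : reachP nn S (k + 1) a b = true := by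
  simp [reachP, h]

theorem reach_mono (nn : Nat) (S : Nat × Nat → Bool) (k m : Nat) (a b : Nat × Nat)
    (hkm : k ≤ m) (h : reachP nn S k a b = true) : reachP nn S m a b = true := by
  induction m with
  | zero =>
    have : k = 0 := by omega
    exact this ▸ h
  | succ m ih =>
    rcases Nat.lt_or_ge k (m + 1) with hk | hk
    · exact reach_succ nn S m a b (ih (by omega))
    · have : k = m + 1 := by omega
      exact this ▸ h

theorem reach_step (nn : Nat) (S : Nat × Nat → Bool) (k : Nat) (a r b : Nat × Nat)
    (ha : S a = true) (hr : r ∈ nbrsP nn S a) (h : reachP nn S k r b = true) :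
    reachP nn S (k + 1) a b = true := by
  simp only [reachP, Bool.or_eq_true, Bool.and_eq_true, List.any_eq_true]
  exact Or.inr ⟨ha, r, hr, h⟩

theorem reach_trans (nn : Nat) (S : Nat × Nat → Bool) (k m : Nat) (a b c : Nat × Nat)
    (h1 : reachP nn S k a b = true) (h2 : reachP nn S m b c = true) :
    reachP nn S (k + m) a c = true := by
  induction k generalizing a with
  | zero =>
    simp only [reachP, decide_eq_true_eq] at h1
    subst h1
    exact reach_mono nn S m (0 + m) a c (by omega) h2
  | succ k ih =>
    simp only [reachP, Bool.or_eq_true, Bool.and_eq_true, List.any_eq_true] at h1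
    rcases h1 with h1 | ⟨ha, r, hr, hrb⟩
    · have := ih a h1
      exact reach_mono nn S (k + m) (k + 1 + m) a c (by omega) this
    · have := ih r hrb
      have := reach_step nn S (k + m) a r c ha hr this
      exact reach_mono nn S (k + m + 1) (k + 1 + m) a c (by omega) this

theorem reach_snoc (nn : Nat) (S : Nat × Nat → Bool) (k : Nat) (a b c : Nat × Nat)
    (h : reachP nn S k a b = true) (hadj : adjP nn S b c = true) :
    reachP nn S (k + 1) a c = true := by
  simp only [adjP, Bool.and_eq_true, decide_eq_true_eq] at hadj
  exact reach_trans nn S k 1 a b c h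
    (reach_step nn S 0 b c c hadj.1 hadj.2 (reach_refl nn S 0 c))

theorem reach_symm (nn : Nat) (S : Nat × Nat → Bool)
    (hS : ∀ a, S a = true → a.1 < nn ∧ a.2 < nn) (k : Nat) (a b : Nat × Nat)
    (h : reachP nn S k a b = true) : reachP nn S k b a = true := by
  induction k generalizing a with
  | zero =>
    simp only [reachP, decide_eq_true_eq] at h ⊢
    exact h.symm
  | succ k ih =>
    simp only [reachP, Bool.or_eq_true, Bool.and_eq_true, List.any_eq_true] at h
    rcases h with h | ⟨ha, r, hr, hrb⟩
    · exact reach_succ nn S k b a (ih a h)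
    · have hba : reachP nn S k b r = true := ih r hrb
      have hadj : adjP nn S r a = true := by
        simp only [adjP, Bool.and_eq_true, decide_eq_true_eq]
        exact ⟨((mem_nbrsP nn S a r).1 hr).1, nbrs_symm nn S hS a r ha hr⟩
      exact reach_snoc nn S k b r a hba hadj

theorem reach_safe (nn : Nat) (S : Nat × Nat → Bool) (k : Nat) (a b : Nat × Nat)
    (h : reachP nn S k a b = true) : a = b ∨ (S a = true ∧ S b = true) := by
  induction k generalizing a with
  | zero =>
    simp only [reachP, decide_eq_true_eq] at h
    exact Or.inl h
  | succ k ih =>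
    simp only [reachP, Bool.or_eq_true, Bool.and_eq_true, List.any_eq_true] at h
    rcases h with h | ⟨ha, r, hr, hrb⟩
    · exact ih a h
    · right
      refine ⟨ha, ?_⟩
      have hrS : S r = true := ((mem_nbrsP nn S a r).1 hr).1
      rcases ih r hrb with rfl | ⟨-, hb⟩
      · exact hrS
      · exact hb
-- ===== path shortening via SimpleGraph =====
def sgOf (nn : Nat) (S : Nat × Nat → Bool)
    (hS : ∀ a, S a = true → a.1 < nn ∧ a.2 < nn) : SimpleGraph (Fin nn × Fin nn) where
  Adj u v := adjP nn S (u.1.1, u.2.1) (v.1.1, v.2.1) = true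
  symm := by
    intro u v h
    exact adj_symm nn S hS _ _ h
  loopless := ⟨by
    intro u h
    simp only [adjP, Bool.and_eq_true, decide_eq_true_eq] at h
    exact not_mem_nbrs_self nn S _ h.2⟩

theorem walk_of_reach (nn : Nat) (S : Nat × Nat → Bool)
    (hS : ∀ a, S a = true → a.1 < nn ∧ a.2 < nn) (k : Nat) (a b : Nat × Nat)
    (h : reachP nn S k a b = true)
    (ha1 : a.1 < nn) (ha2 : a.2 < nn) (hb1 : b.1 < nn) (hb2 : b.2 < nn) :
    Nonempty ((sgOf nn S hS).Walk (⟨a.1, ha1⟩, ⟨a.2, ha2⟩) (⟨b.1, hb1⟩, ⟨b.2, hb2⟩)) := by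
  induction k generalizing a with
  | zero =>
    simp only [reachP, decide_eq_true_eq] at h
    subst h
    exact ⟨SimpleGraph.Walk.nil⟩
  | succ k ih =>
    simp only [reachP, Bool.or_eq_true, Bool.and_eq_true, List.any_eq_true] at h
    rcases h with h | ⟨haS, r, hr, hrb⟩
    · exact ih a h ha1 ha2
    · have hrS : S r = true := ((mem_nbrsP nn S a r).1 hr).1
      have hrbnd := hS r hrS
      rcases ih r hrb hrbnd.1 hrbnd.2 with ⟨w⟩
      have hadj : (sgOf nn S hS).Adj (⟨a.1, ha1⟩, ⟨a.2, ha2⟩) (⟨r.1, hrbnd.1⟩, ⟨r.2, hrbnd.2⟩) := by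
        show adjP nn S (a.1, a.2) (r.1, r.2) = true
        simp only [adjP, Bool.and_eq_true, decide_eq_true_eq]
        exact ⟨haS, by simpa using hr⟩
      exact ⟨SimpleGraph.Walk.cons hadj w⟩

theorem reach_of_walk (nn : Nat) (S : Nat × Nat → Bool)
    (hS : ∀ a, S a = true → a.1 < nn ∧ a.2 < nn) (u v : Fin nn × Fin nn)
    (w : (sgOf nn S hS).Walk u v) :
    reachP nn S w.length (u.1.1, u.2.1) (v.1.1, v.2.1) = true := by
  induction w with
  | nil => simp [reachP]
  | @cons x y z h w ih =>
    have hadj : adjP nn S (x.1.1, x.2.1) (y.1.1, y.2.1) = true := h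
    simp only [adjP, Bool.and_eq_true, decide_eq_true_eq] at hadj
    exact reach_step nn S _ _ _ _ hadj.1 hadj.2 ih

theorem reach_shorten (nn : Nat) (S : Nat × Nat → Bool)
    (hS : ∀ a, S a = true → a.1 < nn ∧ a.2 < nn) (k : Nat) (a b : Nat × Nat)
    (h : reachP nn S k a b = true) : reachP nn S (nn * nn) a b = true := by
  rcases reach_safe nn S k a b h with rfl | ⟨haS, hbS⟩
  · exact reach_refl nn S _ a
  · have ha := hS a haS
    have hb := hS b hbS
    rcases walk_of_reach nn S hS k a b h ha.1 ha.2 hb.1 hb.2 with ⟨w⟩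
    obtain ⟨w', hp⟩ := w.toPath
    have hlt : w'.length < nn * nn := by
      have := hp.length_lt
      simpa [Fintype.card_prod] using this
    have := reach_of_walk nn S hS _ _ w'
    exact reach_mono nn S _ _ _ _ (by omega) this

theorem reachN_snoc (nn : Nat) (S : Nat × Nat → Bool)
    (hS : ∀ a, S a = true → a.1 < nn ∧ a.2 < nn) (a b c : Nat × Nat)
    (h : reachP nn S (nn * nn) a b = true) (hadj : adjP nn S b c = true) :
    reachP nn S (nn * nn) a c = true :=
  reach_shorten nn S hS _ a c (reach_snoc nn S _ a b c h hadj)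

theorem reachN_trans (nn : Nat) (S : Nat × Nat → Bool)
    (hS : ∀ a, S a = true → a.1 < nn ∧ a.2 < nn) (a b c : Nat × Nat)
    (h1 : reachP nn S (nn * nn) a b = true) (h2 : reachP nn S (nn * nn) b c = true) :
    reachP nn S (nn * nn) a c = true :=
  reach_shorten nn S hS _ a c (reach_trans nn S _ _ a b c h1 h2)

-- ===== fold-min helpers =====
theorem foldl_min_le_init (l : List (Nat × Nat)) (f : Nat × Nat → Nat) (init : Nat) :
    l.foldl (fun b r => min b (f r)) init ≤ init := by
  induction l generalizing init with
  | nil => simp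
  | cons hd tl ih =>
    simp only [List.foldl_cons]
    exact le_trans (ih (min init (f hd))) (by omega)

theorem foldl_min_le_mem (l : List (Nat × Nat)) (f : Nat × Nat → Nat) (init : Nat)
    (r : Nat × Nat) (hr : r ∈ l) : l.foldl (fun b r => min b (f r)) init ≤ f r := by
  induction l generalizing init with
  | nil => cases hr
  | cons hd tl ih =>
    simp only [List.foldl_cons]
    rcases List.mem_cons.1 hr with rfl | hr'
    · exact le_trans (foldl_min_le_init tl f _) (by omega)
    · exact ih (min init (f hd)) hr'

theorem foldl_min_mem (l : List (Nat × Nat)) (f : Nat × Nat → Nat) (init : Nat) :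
    l.foldl (fun b r => min b (f r)) init = init ∨
      ∃ r ∈ l, l.foldl (fun b r => min b (f r)) init = f r := by
  induction l generalizing init with
  | nil => exact Or.inl rfl
  | cons hd tl ih =>
    simp only [List.foldl_cons]
    rcases ih (min init (f hd)) with h | ⟨r, hr, h⟩
    · rcases Nat.le_total init (f hd) with hle | hle
      · left; rw [h]; omega
      · right; exact ⟨hd, List.mem_cons_self, by rw [h]; omega⟩
    · right; exact ⟨r, List.mem_cons_of_mem _ hr, h⟩

-- ===== label lemmas =====
theorem Lb_le (nn : Nat) (S : Nat × Nat → Bool) (k : Nat) (a b : Nat × Nat)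
    (h : reachP nn S k a b = true) : LbP nn S k a ≤ encP nn b := by
  induction k generalizing a with
  | zero =>
    simp only [reachP, decide_eq_true_eq] at h
    subst h; simp [LbP]
  | succ k ih =>
    simp only [reachP, Bool.or_eq_true, Bool.and_eq_true, List.any_eq_true] at h
    rcases h with h | ⟨haS, r, hr, hrb⟩
    · have h1 := ih a h
      by_cases hs : S a = true
      · simp only [LbP, hs, if_true]
        exact le_trans (foldl_min_le_init _ _ _) h1
      · simp only [LbP, Bool.not_eq_true] at hs ⊢
        rw [hs]; simpa using h1
    · simp only [LbP, haS, if_true]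
      exact le_trans (foldl_min_le_mem _ _ _ r hr) (ih r hrb)

theorem Lb_mem (nn : Nat) (S : Nat × Nat → Bool) (k : Nat) (a : Nat × Nat) :
    ∃ b, reachP nn S k a b = true ∧ LbP nn S k a = encP nn b := by
  induction k generalizing a with
  | zero => exact ⟨a, by simp [reachP], rfl⟩
  | succ k ih =>
    by_cases hs : S a = true
    · simp only [LbP, hs, if_true]
      rcases foldl_min_mem (nbrsP nn S a) (LbP nn S k) (LbP nn S k a) with h | ⟨r, hr, h⟩
      · rcases ih a with ⟨b, hb, hv⟩
        exact ⟨b, reach_succ nn S k a b hb, by rw [h, hv]⟩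
      · rcases ih r with ⟨b, hb, hv⟩
        exact ⟨b, reach_step nn S k a r b hs hr hb, by rw [h, hv]⟩
    · simp only [Bool.not_eq_true] at hs
      simp only [LbP, hs]
      rcases ih a with ⟨b, hb, hv⟩
      exact ⟨b, reach_succ nn S k a b hb, by simpa using hv⟩

theorem Lb_congr (nn : Nat) (S : Nat × Nat → Bool) (k k' : Nat)
    (h : ∀ a, LbP nn S k a = LbP nn S k' a) (a : Nat × Nat) :
    LbP nn S (k + 1) a = LbP nn S (k' + 1) a := by
  have hf : (fun (b : Nat) (r : Nat × Nat) => min b (LbP nn S k r)) =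
      (fun (b : Nat) (r : Nat × Nat) => min b (LbP nn S k' r)) := by
    funext b r; rw [h r]
  simp only [LbP, hf, h a]

theorem Lb_persist (nn : Nat) (S : Nat × Nat → Bool) (k : Nat)
    (h : ∀ a, LbP nn S (k + 1) a = LbP nn S k a) :
    ∀ m, k ≤ m → ∀ a, LbP nn S m a = LbP nn S k a := by
  intro m hm
  induction m with
  | zero =>
    have : k = 0 := by omega
    subst this; intro a; rfl
  | succ m ih =>
    rcases Nat.lt_or_ge k (m + 1) with hk | hk
    · intro a
      have hstep : LbP nn S (m + 1) a = LbP nn S (k + 1) a :=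
        Lb_congr nn S m k (ih (by omega)) a
      rw [hstep, h a]
    · have : k = m + 1 := by omega
      subst this; intro a; rfl

theorem LbN_fix (nn : Nat) (S : Nat × Nat → Bool)
    (hS : ∀ a, S a = true → a.1 < nn ∧ a.2 < nn) (a : Nat × Nat) :
    LbP nn S (nn * nn + 1) a = LbP nn S (nn * nn) a := by
  apply Nat.le_antisymm
  · rcases Lb_mem nn S (nn * nn) a with ⟨b, hb, hv⟩
    rw [hv]
    exact Lb_le nn S (nn * nn + 1) a b (reach_succ nn S _ a b hb)
  · rcases Lb_mem nn S (nn * nn + 1) a with ⟨b, hb, hv⟩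
    rw [hv]
    exact Lb_le nn S (nn * nn) a b (reach_shorten nn S hS _ a b hb)

theorem Lb_ge_N (nn : Nat) (S : Nat × Nat → Bool)
    (hS : ∀ a, S a = true → a.1 < nn ∧ a.2 < nn) (m : Nat) (hm : nn * nn ≤ m) (a : Nat × Nat) :
    LbP nn S m a = LbP nn S (nn * nn) a :=
  Lb_persist nn S (nn * nn) (LbN_fix nn S hS) m hm a

-- rep = final label
theorem rep_le_self (nn : Nat) (S : Nat × Nat → Bool) (a : Nat × Nat) :
    LbP nn S (nn * nn) a ≤ encP nn a :=
  Lb_le nn S (nn * nn) a a (reach_refl nn S _ a)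

theorem rep_const (nn : Nat) (S : Nat × Nat → Bool)
    (hS : ∀ a, S a = true → a.1 < nn ∧ a.2 < nn) (a b : Nat × Nat)
    (h : reachP nn S (nn * nn) a b = true) :
    LbP nn S (nn * nn) a = LbP nn S (nn * nn) b := by
  apply Nat.le_antisymm
  · rcases Lb_mem nn S (nn * nn) b with ⟨v, hv, he⟩
    rw [he]
    exact Lb_le nn S _ a v (reachN_trans nn S hS a b v h hv)
  · rcases Lb_mem nn S (nn * nn) a with ⟨v, hv, he⟩
    rw [he]
    exact Lb_le nn S _ b v (reachN_trans nn S hS b a v (reach_symm nn S hS _ a b h) hv)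

-- enc arithmetic
theorem enc_div_mod (nn : Nat) (a : Nat × Nat) (h2 : a.2 < nn) :
    encP nn a / nn = a.1 ∧ encP nn a % nn = a.2 := by
  have hpos : 0 < nn := by omega
  constructor
  · show (a.1 * nn + a.2) / nn = a.1
    rw [Nat.mul_comm, Nat.mul_add_div hpos, Nat.div_eq_of_lt h2]
    omega
  · show (a.1 * nn + a.2) % nn = a.2
    rw [Nat.mul_comm, Nat.mul_add_mod, Nat.mod_eq_of_lt h2]

theorem enc_inj (nn : Nat) (a b : Nat × Nat) (ha : a.2 < nn) (hb : b.2 < nn)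
    (h : encP nn a = encP nn b) : a = b := by
  have h1 := enc_div_mod nn a ha
  have h2 := enc_div_mod nn b hb
  have : a.1 = b.1 := by rw [← h1.1, ← h2.1, h]
  have : a.2 = b.2 := by rw [← h1.2, ← h2.2, h]
  exact Prod.ext (by omega) this

theorem dec_enc (nn : Nat) (p : Nat) (h : p < nn * nn) :
    encP nn (p / nn, p % nn) = p ∧ p / nn < nn ∧ p % nn < nn := by
  have hpos : 0 < nn := by
    rcases Nat.eq_zero_or_pos nn with h0 | h0
    · subst h0; omega
    · exact h0
  refine ⟨?_, ?_, Nat.mod_lt _ hpos⟩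
  · show p / nn * nn + p % nn = p
    rw [Nat.mul_comm]
    exact Nat.div_add_mod p nn
  · exact Nat.div_lt_of_lt_mul (by rw [Nat.mul_comm] at h ⊢; exact h)

-- ===== instantiation =====
def safeP (mm n : Int) (graph : List (List Int)) (a : Nat × Nat) : Bool :=
  decide (a.1 < n.toNat) && decide (a.2 < n.toNat) && decide (mm < pvGetI graph a.1 a.2)

theorem safeP_bounds (mm n : Int) (graph : List (List Int)) :
    ∀ a, safeP mm n graph a = true → a.1 < n.toNat ∧ a.2 < n.toNat := by
  intro a h
  simp only [safeP, Bool.and_eq_true, decide_eq_true_eq] at h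
  exact ⟨h.1.1, h.1.2⟩

-- ===== list access helpers =====
theorem getD_map_range {α : Type} (f : Nat → α) (d : α) (m q : Nat) (h : q < m) :
    (((List.range m).map f).getD q d) = f q := by
  rw [List.getD_eq_getElem _ _ (by simpa using h)]
  simp

theorem length_flatMap_range {α : Type} (f : Nat → Nat → α) (m k : Nat) :
    ((List.range m).flatMap (fun i => (List.range k).map (fun j => f i j))).length = m * k := by
  induction m with
  | zero => simp
  | succ m ih =>
    rw [List.range_succ, List.flatMap_append]
    simp [ih, Nat.succ_mul]

theorem flatMap_range_getD {α : Type} (f : Nat → Nat → α) (d : α) (m k i j : Nat)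
    (hi : i < m) (hj : j < k) :
    (((List.range m).flatMap (fun i => (List.range k).map (fun j => f i j))).getD (i * k + j) d)
      = f i j := by
  induction m with
  | zero => omega
  | succ m ih =>
    rw [List.range_succ, List.flatMap_append]
    rcases Nat.lt_or_ge i m with him | him
    · rw [List.getD_append _ _ _ _ (by
        rw [length_flatMap_range]
        calc i * k + j < i * k + k := by omega
        _ ≤ m * k := by
          have : i + 1 ≤ m := him
          calc i * k + k = (i + 1) * k := by ring
          _ ≤ m * k := Nat.mul_le_mul_right k this)]
      exact ih him
    · have : i = m := by omega
      subst this
      rw [List.getD_append_right _ _ _ _ (by rw [length_flatMap_range]; exact Nat.le_add_right _ _)]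
      rw [length_flatMap_range]
      simp only [List.flatMap_singleton, Nat.add_sub_cancel_left]
      rw [List.getD_eq_getElem _ _ (by simpa using hj)]
      simp

theorem altSafe_length (mm n : Int) (graph : List (List Int)) :
    (altSafe mm n graph).length = n.toNat * n.toNat := by
  simpa [altSafe] using length_flatMap_range
    (fun i j => decide (mm < (graph.getD i []).getD j 0)) n.toNat n.toNat

theorem altSafe_getD_enc (mm n : Int) (graph : List (List Int)) (a : Nat × Nat)
    (h1 : a.1 < n.toNat) (h2 : a.2 < n.toNat) :
    (altSafe mm n graph).getD (encP n.toNat a) false = safeP mm n graph a := by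
  have := flatMap_range_getD (fun i j => decide (mm < (graph.getD i []).getD j 0)) false
    n.toNat n.toNat a.1 a.2 h1 h2
  simp only [altSafe, encP]
  rw [this]
  simp [safeP, pvGetI, h1, h2]

-- ===== altBest computes one label-propagation step =====
theorem chain_seg (S : Nat × Nat → Bool) (f : Nat × Nat → Nat) (c : Prop) [Decidable c]
    (e : Nat × Nat) (b : Nat)
    : (if c ∧ S e = true ∧ f e < b then f e else b)
      = ((if c then [e] else []).filter S).foldl (fun x r => min x (f r)) b := by
  by_cases hc : c
  · by_cases hse : S e = true
    · simp only [hc, if_true, true_and, hse, List.filter_cons, List.filter_nil, if_true,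
        List.foldl_cons, List.foldl_nil]
      rw [Nat.min_def]
      split_ifs <;> omega
    · simp only [Bool.not_eq_true] at hse
      simp [hc, hse]
  · simp [hc]

theorem altBest_eq (mm n : Int) (graph : List (List Int)) (k p : Nat)
    (hp : p < n.toNat * n.toNat) :
    altBest n.toNat (altSafe mm n graph)
      ((List.range (n.toNat * n.toNat)).map
        (fun q => LbP n.toNat (safeP mm n graph) k (q / n.toNat, q % n.toNat))) p
    = LbP n.toNat (safeP mm n graph) (k + 1) (p / n.toNat, p % n.toNat) := by
  set nn := n.toNat with hnn
  set S := safeP mm n graph with hSdef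
  set L := (List.range (nn * nn)).map (fun q => LbP nn S k (q / nn, q % nn)) with hL
  set a : Nat × Nat := (p / nn, p % nn) with ha
  have haa1 : a.1 = p / nn := rfl
  have haa2 : a.2 = p % nn := rfl
  obtain ⟨hpa, ha1, ha2⟩ := dec_enc nn p hp
  have hnn0 : 0 < nn := by omega
  have hXa : a.1 * nn + a.2 = p := hpa
  have hs0 : (altSafe mm n graph).getD p false = S a := by
    rw [← hpa]; exact altSafe_getD_enc mm n graph a (by omega) (by omega)
  have hlab : ∀ q, q < nn * nn → L.getD q 0 = LbP nn S k (q / nn, q % nn) := by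
    intro q hq
    rw [hL]; exact getD_map_range _ 0 _ q hq
  have hlab0 : L.getD p 0 = LbP nn S k a := hlab p hp
  have h1 : ∀ b, (if 0 < p / nn ∧ (altSafe mm n graph).getD (p - nn) false = true ∧
        L.getD (p - nn) 0 < b then L.getD (p - nn) 0 else b)
      = ((if 0 < a.1 then [(a.1 - 1, a.2)] else []).filter S).foldl
          (fun x r => min x (LbP nn S k r)) b := by
    intro b
    by_cases hg : 0 < p / nn
    · have hg' : 0 < a.1 := hg
      have hXe : (a.1 - 1) * nn + a.2 = p - nn := by
        have h' : (a.1 - 1) * nn = a.1 * nn - nn := Nat.sub_one_mul a.1 nn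
        have h'' : nn ≤ a.1 * nn := Nat.le_mul_of_pos_left nn hg'
        omega
      have hpn : p - nn = encP nn (a.1 - 1, a.2) := by
        show p - nn = (a.1 - 1) * nn + a.2
        omega
      have hdec := enc_div_mod nn (a.1 - 1, a.2) (show a.2 < nn by omega)
      have hsafe : (altSafe mm n graph).getD (p - nn) false = S (a.1 - 1, a.2) := by
        rw [hpn]
        exact altSafe_getD_enc mm n graph _ (show a.1 - 1 < nn by omega) (show a.2 < nn by omega)
      have hlabe : L.getD (p - nn) 0 = LbP nn S k (a.1 - 1, a.2) := by
        rw [hlab (p - nn) (by omega), hpn, hdec.1, hdec.2]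
      rw [hsafe, hlabe]
      have hcs := chain_seg S (LbP nn S k) (0 < a.1) (a.1 - 1, a.2) b
      simpa [hg, hg'] using hcs
    · have hg' : ¬ 0 < a.1 := hg
      simp [hg, hg']
  have h2 : ∀ b, (if p / nn < nn - 1 ∧ (altSafe mm n graph).getD (p + nn) false = true ∧
        L.getD (p + nn) 0 < b then L.getD (p + nn) 0 else b)
      = ((if a.1 < nn - 1 then [(a.1 + 1, a.2)] else []).filter S).foldl
          (fun x r => min x (LbP nn S k r)) b := by
    intro b
    by_cases hg : p / nn < nn - 1
    · have hg' : a.1 < nn - 1 := hg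
      have hXe : (a.1 + 1) * nn + a.2 = p + nn := by
        have h' : (a.1 + 1) * nn = a.1 * nn + nn := by rw [Nat.add_mul]; omega
        omega
      have hpn : p + nn = encP nn (a.1 + 1, a.2) := by
        show p + nn = (a.1 + 1) * nn + a.2
        omega
      have hb : p + nn < nn * nn := by
        have h5 : (a.1 + 1 + 1) * nn ≤ nn * nn := Nat.mul_le_mul_right nn (by omega)
        have h6 : (a.1 + 1 + 1) * nn = (a.1 + 1) * nn + nn := by rw [Nat.add_mul ((a.1:Nat) + 1) 1 nn]; omega
        omega
      have hdec := enc_div_mod nn (a.1 + 1, a.2) (show a.2 < nn by omega)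
      have hsafe : (altSafe mm n graph).getD (p + nn) false = S (a.1 + 1, a.2) := by
        rw [hpn]
        exact altSafe_getD_enc mm n graph _ (show a.1 + 1 < nn by omega) (show a.2 < nn by omega)
      have hlabe : L.getD (p + nn) 0 = LbP nn S k (a.1 + 1, a.2) := by
        rw [hlab (p + nn) hb, hpn, hdec.1, hdec.2]
      rw [hsafe, hlabe]
      have hcs := chain_seg S (LbP nn S k) (a.1 < nn - 1) (a.1 + 1, a.2) b
      simpa [hg, hg'] using hcs
    · have hg' : ¬ a.1 < nn - 1 := hg
      simp [hg, hg']
  have h3 : ∀ b, (if 0 < p % nn ∧ (altSafe mm n graph).getD (p - 1) false = true ∧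
        L.getD (p - 1) 0 < b then L.getD (p - 1) 0 else b)
      = ((if 0 < a.2 then [(a.1, a.2 - 1)] else []).filter S).foldl
          (fun x r => min x (LbP nn S k r)) b := by
    intro b
    by_cases hg : 0 < p % nn
    · have hg' : 0 < a.2 := hg
      have hpn : p - 1 = encP nn (a.1, a.2 - 1) := by
        show p - 1 = a.1 * nn + (a.2 - 1)
        omega
      have hdec := enc_div_mod nn (a.1, a.2 - 1) (show a.2 - 1 < nn by omega)
      have hsafe : (altSafe mm n graph).getD (p - 1) false = S (a.1, a.2 - 1) := by
        rw [hpn]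
        exact altSafe_getD_enc mm n graph _ (show a.1 < nn by omega) (show a.2 - 1 < nn by omega)
      have hlabe : L.getD (p - 1) 0 = LbP nn S k (a.1, a.2 - 1) := by
        rw [hlab (p - 1) (by omega), hpn, hdec.1, hdec.2]
      rw [hsafe, hlabe]
      have hcs := chain_seg S (LbP nn S k) (0 < a.2) (a.1, a.2 - 1) b
      simpa [hg, hg'] using hcs
    · have hg' : ¬ 0 < a.2 := hg
      simp [hg, hg']
  have h4 : ∀ b, (if p % nn < nn - 1 ∧ (altSafe mm n graph).getD (p + 1) false = true ∧
        L.getD (p + 1) 0 < b then L.getD (p + 1) 0 else b)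
      = ((if a.2 < nn - 1 then [(a.1, a.2 + 1)] else []).filter S).foldl
          (fun x r => min x (LbP nn S k r)) b := by
    intro b
    by_cases hg : p % nn < nn - 1
    · have hg' : a.2 < nn - 1 := hg
      have hpn : p + 1 = encP nn (a.1, a.2 + 1) := by
        show p + 1 = a.1 * nn + (a.2 + 1)
        omega
      have hb : p + 1 < nn * nn := by
        have h5 : (a.1 + 1) * nn ≤ nn * nn := Nat.mul_le_mul_right nn (by omega)
        have h6 : (a.1 + 1) * nn = a.1 * nn + nn := by rw [Nat.add_mul]; omega
        omega
      have hdec := enc_div_mod nn (a.1, a.2 + 1) (show a.2 + 1 < nn by omega)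
      have hsafe : (altSafe mm n graph).getD (p + 1) false = S (a.1, a.2 + 1) := by
        rw [hpn]
        exact altSafe_getD_enc mm n graph _ (show a.1 < nn by omega) (show a.2 + 1 < nn by omega)
      have hlabe : L.getD (p + 1) 0 = LbP nn S k (a.1, a.2 + 1) := by
        rw [hlab (p + 1) hb, hpn, hdec.1, hdec.2]
      rw [hsafe, hlabe]
      have hcs := chain_seg S (LbP nn S k) (a.2 < nn - 1) (a.1, a.2 + 1) b
      simpa [hg, hg'] using hcs
    · have hg' : ¬ a.2 < nn - 1 := hg
      simp [hg, hg']
  by_cases hs : S a = true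
  · simp only [altBest, hs0, hs, if_true, hlab0]
    rw [h1, h2, h3, h4]
    show _ = LbP nn S (k + 1) a
    simp only [LbP, hs, if_true, nbrsP]
    rw [List.filter_append, List.filter_append, List.filter_append,
      List.foldl_append, List.foldl_append, List.foldl_append]
  · simp only [Bool.not_eq_true] at hs
    simp only [altBest, hs0, hs, Bool.false_eq_true, if_false, hlab0]
    show LbP nn S k a = LbP nn S (k + 1) a
    simp [LbP, hs]

-- ===== round / loop =====
theorem foldl_build_gen (g old : Nat → Nat) (m : Nat) (l0 : List Nat) (b0 : Bool) :
    (List.range m).foldl (fun acc p => (acc.1 ++ [g p], acc.2 || decide (g p ≠ old p))) (l0, b0)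
      = (l0 ++ (List.range m).map g, b0 || (List.range m).any (fun p => decide (g p ≠ old p))) := by
  induction m with
  | zero => simp
  | succ m ih =>
    rw [List.range_succ, List.foldl_append, ih]
    simp [Bool.or_assoc]

theorem any_congr_mem {α : Type} (l : List α) (f g : α → Bool)
    (h : ∀ x ∈ l, f x = g x) : l.any f = l.any g := by
  induction l with
  | nil => rfl
  | cons hd tl ih =>
    simp only [List.any_cons]
    rw [h hd (List.mem_cons_self), ih (fun x hx => h x (List.mem_cons_of_mem _ hx))]

theorem altRound_eq (mm n : Int) (graph : List (List Int)) (k : Nat) :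
    altRound n.toNat (altSafe mm n graph)
      ((List.range (n.toNat * n.toNat)).map
        (fun q => LbP n.toNat (safeP mm n graph) k (q / n.toNat, q % n.toNat)))
    = ((List.range (n.toNat * n.toNat)).map
        (fun q => LbP n.toNat (safeP mm n graph) (k + 1) (q / n.toNat, q % n.toNat)),
       (List.range (n.toNat * n.toNat)).any (fun p =>
         decide (LbP n.toNat (safeP mm n graph) (k + 1) (p / n.toNat, p % n.toNat) ≠
                 LbP n.toNat (safeP mm n graph) k (p / n.toNat, p % n.toNat)))) := by
  set nn := n.toNat with hnn
  set S := safeP mm n graph with hSdef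
  set L := (List.range (nn * nn)).map (fun q => LbP nn S k (q / nn, q % nn)) with hL
  have hlen : (altSafe mm n graph).length = nn * nn := altSafe_length mm n graph
  have hbuild := foldl_build_gen (fun p => altBest nn (altSafe mm n graph) L p)
    (fun p => L.getD p 0) (nn * nn) [] false
  have : altRound nn (altSafe mm n graph) L =
      ((List.range (nn * nn)).map (fun p => altBest nn (altSafe mm n graph) L p),
       (List.range (nn * nn)).any (fun p =>
         decide (altBest nn (altSafe mm n graph) L p ≠ L.getD p 0))) := by
    rw [altRound, hlen]
    simpa using hbuild
  rw [this]
  have hmap : ∀ p ∈ List.range (nn * nn),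
      altBest nn (altSafe mm n graph) L p = LbP nn S (k + 1) (p / nn, p % nn) := by
    intro p hp
    exact altBest_eq mm n graph k p (by simpa using hp)
  refine congrArg₂ Prod.mk (List.map_congr_left hmap) ?_
  apply any_congr_mem
  intro p hp
  have h1 := hmap p hp
  have h2 : L.getD p 0 = LbP nn S k (p / nn, p % nn) :=
    getD_map_range _ 0 _ p (by simpa using hp)
  rw [h1, h2]

-- ===== the loop reaches the stable labels =====
theorem Lb_fix_all (mm n : Int) (graph : List (List Int)) (k : Nat)
    (h : ∀ p, p < n.toNat * n.toNat →
      LbP n.toNat (safeP mm n graph) (k + 1) (p / n.toNat, p % n.toNat)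
        = LbP n.toNat (safeP mm n graph) k (p / n.toNat, p % n.toNat)) :
    ∀ a, LbP n.toNat (safeP mm n graph) (k + 1) a = LbP n.toNat (safeP mm n graph) k a := by
  intro a
  set nn := n.toNat
  set S := safeP mm n graph with hSdef
  by_cases hs : S a = true
  · obtain ⟨hb1, hb2⟩ := safeP_bounds mm n graph a hs
    have henc : encP nn a < nn * nn := by
      have h5 : (a.1 + 1) * nn ≤ nn * nn := Nat.mul_le_mul_right nn (by omega)
      have h6 : (a.1 + 1) * nn = a.1 * nn + nn := by rw [Nat.add_mul]; omega
      show a.1 * nn + a.2 < nn * nn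
      omega
    have hdec := enc_div_mod nn a hb2
    have := h (encP nn a) henc
    rw [hdec.1, hdec.2] at this
    simpa using this
  · simp only [Bool.not_eq_true] at hs
    show LbP nn S (k + 1) a = LbP nn S k a
    simp [LbP, hs]

theorem altLoop_eq (mm n : Int) (graph : List (List Int)) :
    ∀ (f k : Nat), n.toNat * n.toNat + 1 ≤ k + f →
    altLoop n.toNat (altSafe mm n graph) f
      ((List.range (n.toNat * n.toNat)).map
        (fun q => LbP n.toNat (safeP mm n graph) k (q / n.toNat, q % n.toNat)))
    = (List.range (n.toNat * n.toNat)).map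
        (fun q => LbP n.toNat (safeP mm n graph) (n.toNat * n.toNat) (q / n.toNat, q % n.toNat)) := by
  intro f
  induction f with
  | zero =>
    intro k hk
    simp only [altLoop]
    apply List.map_congr_left
    intro q hq
    exact Lb_ge_N n.toNat (safeP mm n graph) (safeP_bounds mm n graph) k (by omega) _
  | succ f ih =>
    intro k hk
    show (let r := altRound n.toNat (altSafe mm n graph) _;
      if r.2 then altLoop n.toNat (altSafe mm n graph) f r.1 else r.1) = _
    rw [altRound_eq mm n graph k]
    by_cases hc : (List.range (n.toNat * n.toNat)).any (fun p =>
        decide (LbP n.toNat (safeP mm n graph) (k + 1) (p / n.toNat, p % n.toNat) ≠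
                LbP n.toNat (safeP mm n graph) k (p / n.toNat, p % n.toNat))) = true
    · simp only [hc, if_true]
      exact ih (k + 1) (by omega)
    · simp only [Bool.not_eq_true] at hc
      simp only [hc, Bool.false_eq_true, if_false]
      have hfix : ∀ p, p < n.toNat * n.toNat →
          LbP n.toNat (safeP mm n graph) (k + 1) (p / n.toNat, p % n.toNat)
            = LbP n.toNat (safeP mm n graph) k (p / n.toNat, p % n.toNat) := by
        intro p hp
        have := List.any_eq_false.1 hc p (by simpa using hp)
        simpa using this
      have hall := Lb_fix_all mm n graph k hfix
      have hpersist := Lb_persist n.toNat (safeP mm n graph) k hall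
      apply List.map_congr_left
      intro q hq
      rcases Nat.le_total k (n.toNat * n.toNat) with hkn | hkn
      · rw [hpersist (n.toNat * n.toNat) hkn _, hall _]
      · rw [Lb_ge_N n.toNat (safeP mm n graph) (safeP_bounds mm n graph) (k + 1) (by omega) _]

-- ===== final B-side form =====
theorem range_eq_llist0 (mm n : Int) (graph : List (List Int)) :
    (List.range (n.toNat * n.toNat) : List Nat)
      = (List.range (n.toNat * n.toNat)).map
          (fun q => LbP n.toNat (safeP mm n graph) 0 (q / n.toNat, q % n.toNat)) := by
  conv_lhs => rw [← List.map_id (List.range (n.toNat * n.toNat))]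
  apply List.map_congr_left
  intro q hq
  show q = LbP n.toNat (safeP mm n graph) 0 (q / n.toNat, q % n.toNat)
  have := dec_enc n.toNat q (by simpa using hq)
  show q = encP n.toNat (q / n.toNat, q % n.toNat)
  omega

theorem raining_alt_eq (mm n : Int) (graph : List (List Int)) :
    raining_alt mm n graph =
      (((List.range (n.toNat * n.toNat)).filter (fun p =>
        safeP mm n graph (p / n.toNat, p % n.toNat) &&
          (LbP n.toNat (safeP mm n graph) (n.toNat * n.toNat) (p / n.toNat, p % n.toNat) == p))).length
        : Int) := by
  have hlen : (altSafe mm n graph).length = n.toNat * n.toNat := altSafe_length mm n graph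
  show (((List.range (altSafe mm n graph).length).filter (fun p =>
      (altSafe mm n graph).getD p false &&
        ((altLoop n.toNat (altSafe mm n graph) ((altSafe mm n graph).length + 2)
          (List.range (altSafe mm n graph).length)).getD p 0 == p))).length : Int) = _
  rw [hlen]
  have hloop : altLoop n.toNat (altSafe mm n graph) (n.toNat * n.toNat + 2)
      (List.range (n.toNat * n.toNat))
      = (List.range (n.toNat * n.toNat)).map
          (fun q => LbP n.toNat (safeP mm n graph) (n.toNat * n.toNat) (q / n.toNat, q % n.toNat)) := by
    have h0 := altLoop_eq mm n graph (n.toNat * n.toNat + 2) 0 (by omega)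
    rw [← range_eq_llist0 mm n graph] at h0
    exact h0
  rw [hloop]
  congr 1
  refine congrArg List.length (List.filter_congr ?_)
  intro p hp
  have hplt : p < n.toNat * n.toNat := by simpa using hp
  obtain ⟨hpa, h1, h2⟩ := dec_enc n.toNat p hplt
  have hsafe : (altSafe mm n graph).getD p false = safeP mm n graph (p / n.toNat, p % n.toNat) := by
    conv_lhs => rw [← hpa]
    exact altSafe_getD_enc mm n graph _ h1 h2
  have hlabp : ((List.range (n.toNat * n.toNat)).map
      (fun q => LbP n.toNat (safeP mm n graph) (n.toNat * n.toNat) (q / n.toNat, q % n.toNat))).getD p 0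
      = LbP n.toNat (safeP mm n graph) (n.toNat * n.toNat) (p / n.toNat, p % n.toNat) :=
    getD_map_range _ 0 _ p hplt
  rw [hsafe, hlabp]

-- ===== visited-matrix lemmas =====
def shapeM (nn : Nat) (M : List (List Bool)) : Prop :=
  M.length = nn ∧ ∀ k, k < nn → (M.getD k []).length = nn

def toPairZ (e : Int × Int) : Nat × Nat := (e.1.toNat, e.2.toNat)

theorem getD_set_if {α : Type} (l : List α) (i k : Nat) (x d : α) :
    (l.set i x).getD k d = if k = i ∧ i < l.length then x else l.getD k d := by
  rw [List.getD_eq_getElem?_getD, List.getD_eq_getElem?_getD, List.getElem?_set]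
  split_ifs with h1 h2 h3 <;> simp_all

theorem getD_replicate_if {α : Type} (m k : Nat) (x d : α) :
    (List.replicate m x).getD k d = if k < m then x else d := by
  rw [List.getD_eq_getElem?_getD, List.getElem?_replicate]
  split_ifs <;> simp

theorem shape_init (nn : Nat) : shapeM nn (List.replicate nn (List.replicate nn false)) := by
  refine ⟨by simp, ?_⟩
  intro k hk
  rw [getD_replicate_if, if_pos hk]
  simp

theorem getB_init (nn : Nat) (a b : Nat) :
    pvGetB (List.replicate nn (List.replicate nn false)) a b = false := by
  rw [pvGetB, getD_replicate_if]
  split_ifs with h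
  · rw [getD_replicate_if]
    split_ifs <;> rfl
  · rfl
theorem shape_setB (nn : Nat) (M : List (List Bool)) (i j : Nat) (hsh : shapeM nn M) :
    shapeM nn (pvSetB M i j) := by
  refine ⟨by rw [pvSetB, List.length_set, hsh.1], ?_⟩
  intro k hk
  rw [pvSetB, getD_set_if]
  split_ifs with hcase
  · rw [List.length_set]
    exact hsh.2 i (by rw [← hsh.1]; exact hcase.2)
  · exact hsh.2 k hk

theorem getB_setB (nn : Nat) (M : List (List Bool)) (i j : Nat) (hsh : shapeM nn M)
    (hi : i < nn) (hj : j < nn) (a b : Nat) :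
    pvGetB (pvSetB M i j) a b = if a = i ∧ b = j then true else pvGetB M a b := by
  have hiM : i < M.length := by rw [hsh.1]; omega
  have hjrow : j < (M.getD i []).length := by rw [hsh.2 i hi]; omega
  rw [pvGetB, pvSetB, getD_set_if]
  rcases eq_or_ne a i with rfl | hne
  · rw [if_pos ⟨rfl, hiM⟩, getD_set_if]
    rcases eq_or_ne b j with rfl | hbe
    · rw [if_pos ⟨rfl, hjrow⟩, if_pos ⟨rfl, rfl⟩]
    · rw [if_neg (by tauto), if_neg (by tauto)]
      rfl
  · rw [if_neg (by tauto), if_neg (by tauto)]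
    rfl

-- ===== region characterization =====
theorem region_getI (mm n : Int) (graph : List (List Int)) (i j : Nat)
    (hi : i < n.toNat) (hj : j < n.toNat) :
    pvGetI (pvRegion mm n graph) i j = if pvGetI graph i j ≤ mm then 1 else 0 := by
  show ((pvRegion mm n graph).getD i []).getD j 0 = _
  rw [pvRegion, getD_map_range _ [] _ i hi, getD_map_range _ 0 _ j hj]

theorem region_zero_iff (mm n : Int) (graph : List (List Int)) (i j : Nat)
    (hi : i < n.toNat) (hj : j < n.toNat) :
    pvGetI (pvRegion mm n graph) i j = 0 ↔ safeP mm n graph (i, j) = true := by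
  rw [region_getI mm n graph i j hi hj]
  simp only [safeP, Bool.and_eq_true, decide_eq_true_eq]
  split_ifs with h
  · exact iff_of_false (by norm_num) (by rintro ⟨-, h'⟩; omega)
  · exact iff_of_true rfl ⟨⟨hi, hj⟩, by omega⟩

-- ===== marked-set Finset =====
def markF (nn : Nat) (M : List (List Bool)) : Finset (Nat × Nat) :=
  (gridF nn).filter (fun a => pvGetB M a.1 a.2 = true)

theorem mem_markF (nn : Nat) (M : List (List Bool)) (a : Nat × Nat) :
    a ∈ markF nn M ↔ a.1 < nn ∧ a.2 < nn ∧ pvGetB M a.1 a.2 = true := by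
  simp [markF, gridF, Finset.mem_filter, Finset.mem_product, and_assoc]

theorem compC_card_le (nn : Nat) (S : Nat × Nat → Bool) (c : Nat × Nat) :
    (compC nn S c).card ≤ nn * nn := by
  calc (compC nn S c).card ≤ (gridF nn).card := Finset.card_le_card (Finset.filter_subset _ _)
  _ = nn * nn := by simp [gridF]

-- ===== characterization of the four-direction scan of one popped cell =====
theorem fold_try (mm n : Int) (graph : List (List Int)) (x y : Int) (ds : List (Int × Int))
    (M0 : List (List Bool)) (q0 : List (Int × Int)) (hsh : shapeM n.toNat M0) :
    ∃ app : List (Int × Int),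
      (ds.foldl (fun st d => pvTry n (pvRegion mm n graph) st (x + d.1) (y + d.2)) (M0, q0)).2
        = q0 ++ app ∧
      shapeM n.toNat (ds.foldl (fun st d => pvTry n (pvRegion mm n graph) st (x + d.1) (y + d.2)) (M0, q0)).1 ∧
      (∀ e ∈ app, (∃ d ∈ ds, e = (x + d.1, y + d.2)) ∧ 0 ≤ e.1 ∧ e.1 < n ∧ 0 ≤ e.2 ∧ e.2 < n ∧
        safeP mm n graph (toPairZ e) = true ∧ pvGetB M0 (toPairZ e).1 (toPairZ e).2 = false) ∧
      (app.map toPairZ).Nodup ∧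
      (∀ a : Nat × Nat,
        pvGetB (ds.foldl (fun st d => pvTry n (pvRegion mm n graph) st (x + d.1) (y + d.2)) (M0, q0)).1 a.1 a.2 = true ↔
          (pvGetB M0 a.1 a.2 = true ∨ ∃ e ∈ app, toPairZ e = a)) ∧
      (∀ d ∈ ds, 0 ≤ x + d.1 → x + d.1 < n → 0 ≤ y + d.2 → y + d.2 < n →
        safeP mm n graph (toPairZ (x + d.1, y + d.2)) = true →
        (pvGetB M0 (x + d.1).toNat (y + d.2).toNat = true ∨ (x + d.1, y + d.2) ∈ app)) := by
  induction ds generalizing M0 q0 with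
  | nil =>
    refine ⟨[], by simp, by simpa using hsh, by simp, by simp, ?_, by simp⟩
    intro a
    simp
  | cons d ds ih =>
    simp only [List.foldl_cons]
    set nx := x + d.1 with hnx
    set ny := y + d.2 with hny
    by_cases hC : 0 ≤ nx ∧ nx < n ∧ 0 ≤ ny ∧ ny < n ∧ pvGetB M0 nx.toNat ny.toNat = false ∧
        pvGetI (pvRegion mm n graph) nx.toNat ny.toNat = 0
    · -- the candidate fires: mark it and append it
      have hstep : pvTry n (pvRegion mm n graph) (M0, q0) nx ny
          = (pvSetB M0 nx.toNat ny.toNat, q0 ++ [(nx, ny)]) := by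
        rw [pvTry, if_pos hC]
      rw [hstep]
      obtain ⟨hx0, hxn, hy0, hyn, hunm, hreg⟩ := hC
      have hxb : nx.toNat < n.toNat := by omega
      have hyb : ny.toNat < n.toNat := by omega
      have hsafe : safeP mm n graph (nx.toNat, ny.toNat) = true :=
        (region_zero_iff mm n graph _ _ hxb hyb).1 hreg
      have hsh1 : shapeM n.toNat (pvSetB M0 nx.toNat ny.toNat) := shape_setB _ _ _ _ hsh
      obtain ⟨app', hq', hshR, happ', hnd', hmem', hcov'⟩ := ih (pvSetB M0 nx.toNat ny.toNat) (q0 ++ [(nx, ny)]) hsh1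
      have hget1 : ∀ a b : Nat, pvGetB (pvSetB M0 nx.toNat ny.toNat) a b
          = if a = nx.toNat ∧ b = ny.toNat then true else pvGetB M0 a b :=
        getB_setB n.toNat M0 nx.toNat ny.toNat hsh hxb hyb
      refine ⟨(nx, ny) :: app', ?_, hshR, ?_, ?_, ?_, ?_⟩
      · rw [hq', List.append_assoc]
        rfl
      · intro e he
        rcases List.mem_cons.1 he with rfl | he'
        · exact ⟨⟨d, List.mem_cons_self, rfl⟩, hx0, hxn, hy0, hyn, hsafe, hunm⟩
        · obtain ⟨⟨d', hd', herm⟩, he1, he2, he3, he4, hesafe, heunm⟩ := happ' e he'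
          refine ⟨⟨d', List.mem_cons_of_mem _ hd', herm⟩, he1, he2, he3, he4, hesafe, ?_⟩
          rw [hget1] at heunm
          by_cases hcc : (toPairZ e).1 = nx.toNat ∧ (toPairZ e).2 = ny.toNat
          · rw [if_pos hcc] at heunm
            cases heunm
          · rw [if_neg hcc] at heunm
            exact heunm
      · rw [List.map_cons]
        refine List.nodup_cons.2 ⟨?_, hnd'⟩
        intro hmem
        rcases List.mem_map.1 hmem with ⟨e', he', heq⟩
        obtain ⟨-, -, -, -, -, -, heunm⟩ := happ' e' he'
        rw [hget1] at heunm
        have : toPairZ e' = (nx.toNat, ny.toNat) := by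
          rw [heq]
          rfl
        rw [this] at heunm
        simp at heunm
      · intro a
        rw [hmem' a, hget1]
        constructor
        · rintro (h | h)
          · by_cases hcc : a.1 = nx.toNat ∧ a.2 = ny.toNat
            · right
              exact ⟨(nx, ny), List.mem_cons_self, by
                show (nx.toNat, ny.toNat) = a
                rw [Prod.ext_iff]
                exact ⟨hcc.1.symm, hcc.2.symm⟩⟩
            · rw [if_neg hcc] at h
              exact Or.inl h
          · rcases h with ⟨e, he, heq⟩
            exact Or.inr ⟨e, List.mem_cons_of_mem _ he, heq⟩
        · rintro (h | ⟨e, he, heq⟩)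
          · left
            split_ifs <;> [rfl; exact h]
          · rcases List.mem_cons.1 he with rfl | he'
            · left
              rw [if_pos ⟨by rw [← heq]; rfl, by rw [← heq]; rfl⟩]
          -- e in app'
            · exact Or.inr ⟨e, he', heq⟩
      · intro d' hd' h1 h2 h3 h4 hS'
        rcases List.mem_cons.1 hd' with rfl | hd''
        · right
          exact List.mem_cons_self
        · have := hcov' d' hd'' h1 h2 h3 h4 hS'
          rcases this with hmk | hin
          · rw [hget1] at hmk
            by_cases hcc : (x + d'.1).toNat = nx.toNat ∧ (y + d'.2).toNat = ny.toNat
            · right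
              have : (x + d'.1, y + d'.2) = (nx, ny) := by
                rw [Prod.ext_iff]
                constructor <;> simp only [] <;> omega
              rw [this]
              exact List.mem_cons_self
            · rw [if_neg hcc] at hmk
              exact Or.inl hmk
          · exact Or.inr (List.mem_cons_of_mem _ hin)
    · -- the candidate does not fire: state unchanged
      have hstep : pvTry n (pvRegion mm n graph) (M0, q0) nx ny = (M0, q0) := by
        rw [pvTry, if_neg hC]
      rw [hstep]
      obtain ⟨app, hq, hshR, happ, hnd, hmem, hcov⟩ := ih M0 q0 hsh
      refine ⟨app, hq, hshR, ?_, hnd, hmem, ?_⟩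
      · intro e he
        obtain ⟨⟨d', hd', herm⟩, rest⟩ := happ e he
        exact ⟨⟨d', List.mem_cons_of_mem _ hd', herm⟩, rest⟩
      · intro d' hd' h1 h2 h3 h4 hS'
        rcases List.mem_cons.1 hd' with rfl | hd''
        · left
          have hxb : (x + d'.1).toNat < n.toNat := by omega
          have hyb : (y + d'.2).toNat < n.toNat := by omega
          have hreg : pvGetI (pvRegion mm n graph) (x + d'.1).toNat (y + d'.2).toNat = 0 :=
            (region_zero_iff mm n graph _ _ hxb hyb).2 hS'
          by_cases hm : pvGetB M0 (x + d'.1).toNat (y + d'.2).toNat = false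
          · exact absurd ⟨h1, h2, h3, h4, hm, hreg⟩ hC
          · simpa using hm
        · exact hcov d' hd'' h1 h2 h3 h4 hS'

-- ===== BFS helpers =====
theorem marked_of_reach (nn : Nat) (S : Nat × Nat → Bool) (P : Nat × Nat → Prop)
    (hclosed : ∀ w, P w → ∀ r, adjP nn S w r = true → P r) :
    ∀ (k : Nat) (b a : Nat × Nat), P b → reachP nn S k b a = true → P a := by
  intro k
  induction k with
  | zero =>
    intro b a hb h
    simp only [reachP, decide_eq_true_eq] at h
    exact h ▸ hb
  | succ k ih =>
    intro b a hb h
    simp only [reachP, Bool.or_eq_true, Bool.and_eq_true, List.any_eq_true] at h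
    rcases h with h | ⟨hbS, r, hr, hrb⟩
    · exact ih b a hb h
    · have hadj : adjP nn S b r = true := by
        simp only [adjP, Bool.and_eq_true, decide_eq_true_eq]
        exact ⟨hbS, hr⟩
      exact ih r a (hclosed b hb r hadj) hrb

theorem app_adj (mm n : Int) (graph : List (List Int)) (x y : Int) (a0 : Nat × Nat)
    (hx : x = (a0.1 : Int)) (hy : y = (a0.2 : Int)) (ha0 : safeP mm n graph a0 = true)
    (e : Int × Int) (hdir : ∃ d ∈ pvDirs, e = (x + d.1, y + d.2))
    (h1 : 0 ≤ e.1) (h2 : e.1 < n) (h3 : 0 ≤ e.2) (h4 : e.2 < n)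
    (hsafe : safeP mm n graph (toPairZ e) = true) :
    adjP n.toNat (safeP mm n graph) a0 (toPairZ e) = true := by
  obtain ⟨hb1, hb2⟩ := safeP_bounds mm n graph a0 ha0
  have hn : ((n.toNat : Int)) = n := Int.toNat_of_nonneg (by omega)
  simp only [adjP, Bool.and_eq_true, decide_eq_true_eq]
  refine ⟨ha0, ?_⟩
  rw [mem_nbrsP]
  refine ⟨hsafe, ?_⟩
  obtain ⟨d, hd, rfl⟩ := hdir
  simp only [pvDirs, List.mem_cons, List.mem_singleton] at hd
  rcases hd with rfl | rfl | rfl | rfl | h0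
  · left
    subst hx; subst hy
    refine ⟨by omega, ?_⟩
    show ((((a0.1 : Int) + (-1)).toNat : Nat), ((a0.2 : Int) + 0).toNat) = (a0.1 - 1, a0.2)
    rw [Prod.ext_iff]
    constructor <;> simp only [] <;> omega
  · right; right; right
    subst hx; subst hy
    have hlt : a0.2 + 1 < n.toNat := by omega
    refine ⟨by omega, ?_⟩
    show ((((a0.1 : Int) + 0).toNat : Nat), ((a0.2 : Int) + 1).toNat) = (a0.1, a0.2 + 1)
    rw [Prod.ext_iff]
    constructor <;> simp only [] <;> omega
  · right; left
    subst hx; subst hy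
    have hlt : a0.1 + 1 < n.toNat := by omega
    refine ⟨by omega, ?_⟩
    show ((((a0.1 : Int) + 1).toNat : Nat), ((a0.2 : Int) + 0).toNat) = (a0.1 + 1, a0.2)
    rw [Prod.ext_iff]
    constructor <;> simp only [] <;> omega
  · right; right; left
    subst hx; subst hy
    refine ⟨by omega, ?_⟩
    show ((((a0.1 : Int) + 0).toNat : Nat), ((a0.2 : Int) + (-1)).toNat) = (a0.1, a0.2 - 1)
    rw [Prod.ext_iff]
    constructor <;> simp only [] <;> omega
  · cases h0

theorem adj_to_dir (mm n : Int) (graph : List (List Int)) (x y : Int) (a0 : Nat × Nat)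
    (hx : x = (a0.1 : Int)) (hy : y = (a0.2 : Int)) (r : Nat × Nat)
    (hadj : adjP n.toNat (safeP mm n graph) a0 r = true) :
    ∃ d ∈ pvDirs, 0 ≤ x + d.1 ∧ x + d.1 < n ∧ 0 ≤ y + d.2 ∧ y + d.2 < n ∧
      toPairZ (x + d.1, y + d.2) = r ∧ safeP mm n graph (toPairZ (x + d.1, y + d.2)) = true := by
  simp only [adjP, Bool.and_eq_true, decide_eq_true_eq] at hadj
  obtain ⟨ha0, hmem⟩ := hadj
  obtain ⟨hb1, hb2⟩ := safeP_bounds mm n graph a0 ha0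
  have hn : ((n.toNat : Int)) = n := Int.toNat_of_nonneg (by omega)
  rcases (mem_nbrsP _ _ a0 r).1 hmem with ⟨hrS, hcase⟩
  obtain ⟨hr1, hr2⟩ := safeP_bounds mm n graph r hrS
  rcases hcase with ⟨hc, rfl⟩ | ⟨hc, rfl⟩ | ⟨hc, rfl⟩ | ⟨hc, rfl⟩
  · refine ⟨(-1, 0), by simp [pvDirs], ?_, ?_, ?_, ?_, ?_, ?_⟩
    · subst hx; omega
    · subst hx; omega
    · subst hy; omega
    · subst hy; omega
    · subst hx; subst hy
      show ((((a0.1 : Int) + (-1)).toNat : Nat), ((a0.2 : Int) + 0).toNat) = (a0.1 - 1, a0.2)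
      rw [Prod.ext_iff]
      constructor <;> simp only [] <;> omega
    · subst hx; subst hy
      have : ((((a0.1 : Int) + (-1)).toNat : Nat), ((a0.2 : Int) + 0).toNat) = (a0.1 - 1, a0.2) := by
        rw [Prod.ext_iff]
        constructor <;> simp only [] <;> omega
      rw [show toPairZ ((a0.1 : Int) + (-1), (a0.2 : Int) + 0) = (a0.1 - 1, a0.2) from this]
      exact hrS
  · refine ⟨(1, 0), by simp [pvDirs], ?_, ?_, ?_, ?_, ?_, ?_⟩
    · subst hx; omega
    · subst hx; omega
    · subst hy; omega
    · subst hy; omega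
    · subst hx; subst hy
      show ((((a0.1 : Int) + 1).toNat : Nat), ((a0.2 : Int) + 0).toNat) = (a0.1 + 1, a0.2)
      rw [Prod.ext_iff]
      constructor <;> simp only [] <;> omega
    · subst hx; subst hy
      have : ((((a0.1 : Int) + 1).toNat : Nat), ((a0.2 : Int) + 0).toNat) = (a0.1 + 1, a0.2) := by
        rw [Prod.ext_iff]
        constructor <;> simp only [] <;> omega
      rw [show toPairZ ((a0.1 : Int) + 1, (a0.2 : Int) + 0) = (a0.1 + 1, a0.2) from this]
      exact hrS
  · refine ⟨(0, -1), by simp [pvDirs], ?_, ?_, ?_, ?_, ?_, ?_⟩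
    · subst hx; omega
    · subst hx; omega
    · subst hy; omega
    · subst hy; omega
    · subst hx; subst hy
      show ((((a0.1 : Int) + 0).toNat : Nat), ((a0.2 : Int) + (-1)).toNat) = (a0.1, a0.2 - 1)
      rw [Prod.ext_iff]
      constructor <;> simp only [] <;> omega
    · subst hx; subst hy
      have : ((((a0.1 : Int) + 0).toNat : Nat), ((a0.2 : Int) + (-1)).toNat) = (a0.1, a0.2 - 1) := by
        rw [Prod.ext_iff]
        constructor <;> simp only [] <;> omega
      rw [show toPairZ ((a0.1 : Int) + 0, (a0.2 : Int) + (-1)) = (a0.1, a0.2 - 1) from this]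
      exact hrS
  · refine ⟨(0, 1), by simp [pvDirs], ?_, ?_, ?_, ?_, ?_, ?_⟩
    · subst hx; omega
    · subst hx; omega
    · subst hy; omega
    · subst hy; omega
    · subst hx; subst hy
      show ((((a0.1 : Int) + 0).toNat : Nat), ((a0.2 : Int) + 1).toNat) = (a0.1, a0.2 + 1)
      rw [Prod.ext_iff]
      constructor <;> simp only [] <;> omega
    · subst hx; subst hy
      have : ((((a0.1 : Int) + 0).toNat : Nat), ((a0.2 : Int) + 1).toNat) = (a0.1, a0.2 + 1) := by
        rw [Prod.ext_iff]
        constructor <;> simp only [] <;> omega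
      rw [show toPairZ ((a0.1 : Int) + 0, (a0.2 : Int) + 1) = (a0.1, a0.2 + 1) from this]
      exact hrS

-- ===== BFS fill correctness =====
theorem bfs_base (mm n : Int) (graph : List (List Int)) (c : Nat × Nat) (V0 : Nat × Nat → Prop)
    (M : List (List Bool))
    (hV0M : ∀ a, V0 a → pvGetB M a.1 a.2 = true)
    (hMsub : ∀ a, pvGetB M a.1 a.2 = true →
      V0 a ∨ reachP n.toNat (safeP mm n graph) (n.toNat * n.toNat) c a = true)
    (hfront : ∀ a, pvGetB M a.1 a.2 = true →
      ∀ b, adjP n.toNat (safeP mm n graph) a b = true → pvGetB M b.1 b.2 = true)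
    (hcov : pvGetB M c.1 c.2 = true) :
    ∀ a, pvGetB M a.1 a.2 = true ↔
      (V0 a ∨ reachP n.toNat (safeP mm n graph) (n.toNat * n.toNat) c a = true) := by
  intro a
  constructor
  · exact hMsub a
  · rintro (h | h)
    · exact hV0M a h
    · exact marked_of_reach n.toNat (safeP mm n graph) (fun w => pvGetB M w.1 w.2 = true)
        hfront (n.toNat * n.toNat) c a hcov h

theorem bfs_go (mm n : Int) (graph : List (List Int)) (c : Nat × Nat) (V0 : Nat × Nat → Prop)
    (hV0closed : ∀ a b, V0 a → adjP n.toNat (safeP mm n graph) a b = true → V0 b)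
    (hV0dis : ∀ a, V0 a → ¬ reachP n.toNat (safeP mm n graph) (n.toNat * n.toNat) c a = true) :
    ∀ (fuel : Nat) (q : List (Int × Int)) (M : List (List Bool)),
    shapeM n.toNat M →
    (∀ e ∈ q, ∃ a : Nat × Nat, e = ((a.1 : Int), (a.2 : Int)) ∧ safeP mm n graph a = true ∧
      reachP n.toNat (safeP mm n graph) (n.toNat * n.toNat) c a = true) →
    (∀ a, V0 a → pvGetB M a.1 a.2 = true) →
    (∀ a, pvGetB M a.1 a.2 = true →
      V0 a ∨ reachP n.toNat (safeP mm n graph) (n.toNat * n.toNat) c a = true) →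
    (∀ a, pvGetB M a.1 a.2 = true → (∃ e ∈ q, e = ((a.1 : Int), (a.2 : Int))) ∨
      ∀ b, adjP n.toNat (safeP mm n graph) a b = true → pvGetB M b.1 b.2 = true) →
    ((∃ e ∈ q, e = ((c.1 : Int), (c.2 : Int))) ∨ pvGetB M c.1 c.2 = true) →
    (q.length + ((compC n.toNat (safeP mm n graph) c) \ markF n.toNat M).card ≤ fuel) →
    (shapeM n.toNat (pvBfs n (pvRegion mm n graph) fuel q M) ∧
     ∀ a, pvGetB (pvBfs n (pvRegion mm n graph) fuel q M) a.1 a.2 = true ↔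
       (V0 a ∨ reachP n.toNat (safeP mm n graph) (n.toNat * n.toNat) c a = true)) := by
  intro fuel
  set nn := n.toNat with hnn
  set S := safeP mm n graph with hSdef
  set N := nn * nn with hN
  have hS := safeP_bounds mm n graph
  induction fuel with
  | zero =>
    intro q M hsh hq hV0M hMsub hfront hcov hfuel
    have hq0 : q = [] := by
      cases q with
      | nil => rfl
      | cons e q' => simp at hfuel
    subst hq0
    rcases hcov with ⟨e, he, -⟩ | hcovM
    · cases he
    refine ⟨by simpa [pvBfs] using hsh, ?_⟩
    have hfront' : ∀ a, pvGetB M a.1 a.2 = true →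
        ∀ b, adjP nn S a b = true → pvGetB M b.1 b.2 = true := by
      intro a ha b hb
      rcases hfront a ha with ⟨e, he, -⟩ | h
      · cases he
      · exact h b hb
    simpa [pvBfs] using bfs_base mm n graph c V0 M hV0M hMsub hfront' hcovM
  | succ fuel ih =>
    intro q M hsh hq hV0M hMsub hfront hcov hfuel
    cases q with
    | nil =>
      rcases hcov with ⟨e, he, -⟩ | hcovM
      · cases he
      refine ⟨by simpa [pvBfs] using hsh, ?_⟩
      have hfront' : ∀ a, pvGetB M a.1 a.2 = true →
          ∀ b, adjP nn S a b = true → pvGetB M b.1 b.2 = true := by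
        intro a ha b hb
        rcases hfront a ha with ⟨e, he, -⟩ | h
        · cases he
        · exact h b hb
      simpa [pvBfs] using bfs_base mm n graph c V0 M hV0M hMsub hfront' hcovM
    | cons e rest =>
      obtain ⟨a0, he0, ha0S, ha0reach⟩ := hq e List.mem_cons_self
      obtain ⟨hxb, hyb⟩ := hS a0 ha0S
      -- unfold one BFS step
      obtain ⟨x, y⟩ := e
      have hx : x = (a0.1 : Int) := by
        have := congrArg Prod.fst he0; simpa using this
      have hy : y = (a0.2 : Int) := by
        have := congrArg Prod.snd he0; simpa using this
      have hxt : x.toNat = a0.1 := by omega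
      have hyt : y.toNat = a0.2 := by omega
      have hv1sh : shapeM nn (pvSetB M x.toNat y.toNat) := shape_setB _ _ _ _ hsh
      have hget1 : ∀ u v : Nat, pvGetB (pvSetB M x.toNat y.toNat) u v
          = if u = a0.1 ∧ v = a0.2 then true else pvGetB M u v := by
        rw [hxt, hyt]
        exact getB_setB nn M a0.1 a0.2 hsh hxb hyb
      obtain ⟨app, happq, happsh, happ, hnd, hmem, hcov'⟩ :=
        fold_try mm n graph x y pvDirs (pvSetB M x.toNat y.toNat) rest hv1sh
      set st := pvDirs.foldl (fun st d => pvTry n (pvRegion mm n graph) st (x + d.1) (y + d.2))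
        (pvSetB M x.toNat y.toNat, rest) with hst
      have hunfold : pvBfs n (pvRegion mm n graph) (fuel + 1) ((x, y) :: rest) M
          = pvBfs n (pvRegion mm n graph) fuel st.2 st.1 := rfl
      rw [hunfold]
      -- the appended cells are adjacent to a0 and reachable from c
      have happadj : ∀ e' ∈ app, adjP nn S a0 (toPairZ e') = true := by
        intro e' he'
        obtain ⟨hdir, h1, h2, h3, h4, hsafe', -⟩ := happ e' he'
        exact app_adj mm n graph x y a0 hx hy ha0S e' hdir h1 h2 h3 h4 hsafe'
      have happreach : ∀ e' ∈ app, reachP nn S N c (toPairZ e') = true := by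
        intro e' he'
        exact reachN_snoc nn S hS c a0 (toPairZ e') ha0reach (happadj e' he')
      -- membership in the new visited matrix
      have hmem2 : ∀ a : Nat × Nat, pvGetB st.1 a.1 a.2 = true ↔
          (pvGetB M a.1 a.2 = true ∨ a = a0 ∨ ∃ e' ∈ app, toPairZ e' = a) := by
        intro a
        rw [hmem a]
        constructor
        · rintro (h | h)
          · rw [hget1] at h
            by_cases hcc : a.1 = a0.1 ∧ a.2 = a0.2
            · exact Or.inr (Or.inl (Prod.ext_iff.2 ⟨hcc.1, hcc.2⟩))
            · rw [if_neg hcc] at h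
              exact Or.inl h
          · exact Or.inr (Or.inr h)
        · rintro (h | rfl | h)
          · left
            rw [hget1]
            split_ifs <;> [rfl; exact h]
          · left
            rw [hget1, if_pos ⟨rfl, rfl⟩]
          · exact Or.inr h
      refine ih st.2 st.1 happsh ?_ ?_ ?_ ?_ ?_ ?_
      · -- queue elements
        rw [happq]
        intro e' he'
        rcases List.mem_append.1 he' with he' | he'
        · exact hq e' (List.mem_cons_of_mem _ he')
        · obtain ⟨-, h1, h2, h3, h4, hsafe', -⟩ := happ e' he'
          refine ⟨toPairZ e', ?_, hsafe', happreach e' he'⟩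
          rw [Prod.ext_iff]
          constructor <;> simp only [toPairZ] <;> omega
      · -- V0 still marked
        intro a ha
        rw [hmem2 a]
        exact Or.inl (hV0M a ha)
      · -- marked cells are V0 or reachable
        intro a ha
        rw [hmem2 a] at ha
        rcases ha with ha | rfl | ⟨e', he', rfl⟩
        · exact hMsub a ha
        · exact Or.inr ha0reach
        · exact Or.inr (happreach e' he')
      · -- frontier invariant
        have hv1_to_st : ∀ b : Nat × Nat, pvGetB (pvSetB M x.toNat y.toNat) b.1 b.2 = true →
            pvGetB st.1 b.1 b.2 = true := by
          intro b hb
          exact (hmem b).2 (Or.inl hb)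
        have hcovb : ∀ (a : Nat × Nat), x = (a.1 : Int) → y = (a.2 : Int) →
            ∀ b, adjP nn S a b = true → pvGetB st.1 b.1 b.2 = true := by
          intro a hx' hy' b hb
          obtain ⟨d, hd, hd1, hd2, hd3, hd4, hdp, hdS⟩ := adj_to_dir mm n graph x y a hx' hy' b hb
          rcases hcov' d hd hd1 hd2 hd3 hd4 hdS with hmk | hin
          · have hfst : (x + d.1).toNat = b.1 := congrArg Prod.fst hdp
            have hsnd : (y + d.2).toNat = b.2 := congrArg Prod.snd hdp
            rw [hfst, hsnd] at hmk
            exact hv1_to_st b hmk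
          · exact (hmem b).2 (Or.inr ⟨(x + d.1, y + d.2), hin, hdp⟩)
        intro a ha
        rw [hmem2 a] at ha
        rcases ha with ha | rfl | ⟨e', he', rfl⟩
        · rcases hfront a ha with ⟨e', he', heq⟩ | h
          · rcases List.mem_cons.1 he' with rfl | he''
            · have hx' : x = (a.1 : Int) := congrArg Prod.fst heq
              have hy' : y = (a.2 : Int) := congrArg Prod.snd heq
              exact Or.inr (hcovb a hx' hy')
            · left
              rw [happq]
              exact ⟨e', List.mem_append_left _ he'', heq⟩
          · right
            intro b hb
            exact hv1_to_st b ((hget1 b.1 b.2).trans (by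
              split_ifs with hcc
              · rfl
              · exact h b hb))
        · exact Or.inr (hcovb a hx hy)
        · left
          rw [happq]
          refine ⟨e', List.mem_append_right _ he', ?_⟩
          obtain ⟨-, h1, -, h3, -, -, -⟩ := happ e' he'
          rw [Prod.ext_iff]
          constructor <;> simp only [toPairZ] <;> omega
      · -- coverage of c
        rcases hcov with ⟨e', he', heq⟩ | hcovM
        · rcases List.mem_cons.1 he' with rfl | he''
          · right
            have hx' : x = (c.1 : Int) := congrArg Prod.fst heq
            have hy' : y = (c.2 : Int) := congrArg Prod.snd heq
            have hca0 : c = a0 := by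
              rw [Prod.ext_iff]
              constructor <;> omega
            subst hca0
            refine (hmem2 c).2 (Or.inr (Or.inl rfl))
          · left
            rw [happq]
            exact ⟨e', List.mem_append_left _ he'', heq⟩
        · right
          exact (hmem2 c).2 (Or.inl hcovM)
      · -- fuel bound
        rw [happq, List.length_append]
        -- the appended cells are distinct unmarked compC-cells
        have happS : ∀ e' ∈ app, toPairZ e' ∈ compC nn S c \ markF nn M := by
          intro e' he'
          obtain ⟨-, h1, h2, h3, h4, hsafe', hunm⟩ := happ e' he'
          have hb := hS (toPairZ e') hsafe'
          rw [Finset.mem_sdiff]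
          constructor
          · rw [compC, Finset.mem_filter]
            refine ⟨?_, happreach e' he'⟩
            simp [gridF, Finset.mem_product]
            omega
          · rw [mem_markF]
            intro hcon
            have := hcon.2.2
            rw [hget1] at hunm
            by_cases hcc : (toPairZ e').1 = a0.1 ∧ (toPairZ e').2 = a0.2
            · rw [if_pos hcc] at hunm
              cases hunm
            · rw [if_neg hcc] at hunm
              rw [this] at hunm
              cases hunm
        have hsubM : markF nn M ⊆ markF nn st.1 := by
          intro a ha
          rw [mem_markF] at ha ⊢
          refine ⟨ha.1, ha.2.1, ?_⟩
          rw [hmem2 a]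
          exact Or.inl ha.2.2
        have happsub : (app.map toPairZ).toFinset ⊆ compC nn S c \ markF nn M := by
          intro a ha
          rw [List.mem_toFinset] at ha
          obtain ⟨e', he', rfl⟩ := List.mem_map.1 ha
          exact happS e' he'
        have happmark : (app.map toPairZ).toFinset ⊆ markF nn st.1 := by
          intro a ha
          rw [List.mem_toFinset] at ha
          obtain ⟨e', he', rfl⟩ := List.mem_map.1 ha
          have hb := hS (toPairZ e') (happ e' he').2.2.2.2.2.1
          rw [mem_markF]
          refine ⟨hb.1, hb.2, ?_⟩
          rw [hmem2 _]
          exact Or.inr (Or.inr ⟨e', he', rfl⟩)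
        have hcard1 : (compC nn S c \ markF nn st.1).card + app.length
            ≤ (compC nn S c \ markF nn M).card := by
          have hsub : compC nn S c \ markF nn st.1
              ⊆ (compC nn S c \ markF nn M) \ (app.map toPairZ).toFinset := by
            intro a ha
            rw [Finset.mem_sdiff] at ha ⊢
            refine ⟨Finset.mem_sdiff.2 ⟨ha.1, fun hmm' => ha.2 (hsubM hmm')⟩, ?_⟩
            intro hmm'
            exact ha.2 (happmark hmm')
          have hlen : (app.map toPairZ).toFinset.card = app.length := by
            rw [List.toFinset_card_of_nodup hnd, List.length_map]
          calc (compC nn S c \ markF nn st.1).card + app.length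
              ≤ ((compC nn S c \ markF nn M) \ (app.map toPairZ).toFinset).card + app.length :=
                Nat.add_le_add_right (Finset.card_le_card hsub) _
          _ = (compC nn S c \ markF nn M).card - (app.map toPairZ).toFinset.card + app.length := by
                rw [Finset.card_sdiff]
                rw [Finset.inter_eq_left.2 happsub]
          _ = (compC nn S c \ markF nn M).card - app.length + app.length := by rw [hlen]
          _ ≤ (compC nn S c \ markF nn M).card := by
                have : (app.map toPairZ).toFinset.card ≤ (compC nn S c \ markF nn M).card :=
                  Finset.card_le_card happsub
                omega
        have hq1 : ((x, y) :: rest).length = rest.length + 1 := by simp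
        rw [hq1] at hfuel
        omega

-- ===== outer scan invariant =====
theorem rep_cell_of_eq (mm n : Int) (graph : List (List Int)) (a q : Nat × Nat)
    (ha1 : a.1 < n.toNat) (ha2 : a.2 < n.toNat)
    (hq : safeP mm n graph q = true)
    (he : LbP n.toNat (safeP mm n graph) (n.toNat * n.toNat) q = encP n.toNat a) :
    reachP n.toNat (safeP mm n graph) (n.toNat * n.toNat) a q = true ∧
      safeP mm n graph a = true ∧
      LbP n.toNat (safeP mm n graph) (n.toNat * n.toNat) a = encP n.toNat a := by
  set nn := n.toNat
  set S := safeP mm n graph with hSdef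
  have hS := safeP_bounds mm n graph
  obtain ⟨v, hv, hev⟩ := Lb_mem nn S (nn * nn) q
  have hvS : S v = true := by
    rcases reach_safe nn S (nn * nn) q v hv with rfl | ⟨-, h⟩
    · exact hq
    · exact h
  have hveq : v = a := by
    apply enc_inj nn v a (hS v hvS).2 ha2
    rw [← hev, he]
  have hra : reachP nn S (nn * nn) a q = true := by
    rw [← hveq]
    exact reach_symm nn S hS _ q v hv
  refine ⟨hra, hveq ▸ hvS, ?_⟩
  rw [rep_const nn S hS a q hra, he]

def AInvP (mm n : Int) (graph : List (List Int)) (t : Nat) (st : Int × List (List Bool)) : Prop :=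
  shapeM n.toNat st.2 ∧
  (∀ a : Nat × Nat, pvGetB st.2 a.1 a.2 = true ↔
    (safeP mm n graph a = true ∧ LbP n.toNat (safeP mm n graph) (n.toNat * n.toNat) a < t)) ∧
  st.1 = (((List.range t).filter (fun p =>
    safeP mm n graph (p / n.toNat, p % n.toNat) &&
      (LbP n.toNat (safeP mm n graph) (n.toNat * n.toNat) (p / n.toNat, p % n.toNat) == p))).length : Int)

theorem cell_step (mm n : Int) (graph : List (List Int)) (i j : Nat)
    (hi : i < n.toNat) (hj : j < n.toNat) (st : Int × List (List Bool))
    (h : AInvP mm n graph (encP n.toNat (i, j)) st) :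
    AInvP mm n graph (encP n.toNat (i, j) + 1)
      (if pvGetI (pvRegion mm n graph) i j = 0 ∧ pvGetB st.2 i j = false
       then (st.1 + 1, pvBfs n (pvRegion mm n graph) (n.toNat * n.toNat + 1)
              [((i : Int), (j : Int))] st.2)
       else st) := by
  have hS := safeP_bounds mm n graph
  set a : Nat × Nat := (i, j) with hadef
  set t := encP n.toNat a with ht
  obtain ⟨hsh, hiff, hcnt⟩ := h
  have htN : t < n.toNat * n.toNat := by
    have h5 : (i + 1) * n.toNat ≤ n.toNat * n.toNat := Nat.mul_le_mul_right n.toNat (by omega)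
    have h6 : (i + 1) * n.toNat = i * n.toNat + n.toNat := by rw [Nat.add_mul]; omega
    show i * n.toNat + j < n.toNat * n.toNat
    omega
  have hdect := enc_div_mod n.toNat a (by simpa using hj)
  have hrle : LbP n.toNat (safeP mm n graph) (n.toNat * n.toNat) a ≤ t := rep_le_self n.toNat (safeP mm n graph) a
  have hfiltT : ∀ u : Int, (((List.range (t + 1)).filter (fun p =>
      (safeP mm n graph) (p / n.toNat, p % n.toNat) && (LbP n.toNat (safeP mm n graph) (n.toNat * n.toNat) (p / n.toNat, p % n.toNat) == p))).length : Int)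
      = (((List.range t).filter (fun p =>
        (safeP mm n graph) (p / n.toNat, p % n.toNat) && (LbP n.toNat (safeP mm n graph) (n.toNat * n.toNat) (p / n.toNat, p % n.toNat) == p))).length : Int)
        + (if (safeP mm n graph) (t / n.toNat, t % n.toNat) && (LbP n.toNat (safeP mm n graph) (n.toNat * n.toNat) (t / n.toNat, t % n.toNat) == t) then 1 else 0) := by
    intro u
    rw [List.range_succ, List.filter_append]
    simp only [List.length_append, List.filter_cons, List.filter_nil]
    split_ifs with hc
    · simp
    · simp
  by_cases hcond : pvGetI (pvRegion mm n graph) i j = 0 ∧ pvGetB st.2 i j = false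
  · rw [if_pos hcond]
    have hsafe : (safeP mm n graph) a = true := (region_zero_iff mm n graph i j hi hj).1 hcond.1
    have hnotv : ¬ ((safeP mm n graph) a = true ∧ LbP n.toNat (safeP mm n graph) (n.toNat * n.toNat) a < t) := by
      intro hcon
      have hmark : pvGetB st.2 i j = true := (hiff a).2 hcon
      rw [hcond.2] at hmark
      cases hmark
    have hnlt : ¬ (LbP n.toNat (safeP mm n graph) (n.toNat * n.toNat) a < t) :=
      fun hlt => hnotv ⟨hsafe, hlt⟩
    have hrept : LbP n.toNat (safeP mm n graph) (n.toNat * n.toNat) a = t := by omega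
    have hgo := bfs_go mm n graph a (fun b => (safeP mm n graph) b = true ∧ LbP n.toNat (safeP mm n graph) (n.toNat * n.toNat) b < t)
      (by
        intro b b' hb hadj
        have hreach : reachP n.toNat (safeP mm n graph) (n.toNat * n.toNat) b b' = true :=
          reach_shorten n.toNat (safeP mm n graph) hS 1 b b'
            (reach_snoc n.toNat (safeP mm n graph) 0 b b b' (reach_refl n.toNat (safeP mm n graph) 0 b) hadj)
        have hbS' : (safeP mm n graph) b' = true := by
          simp only [adjP, Bool.and_eq_true, decide_eq_true_eq] at hadj
          exact ((mem_nbrsP n.toNat (safeP mm n graph) b b').1 hadj.2).1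
        refine ⟨hbS', ?_⟩
        rw [← rep_const n.toNat (safeP mm n graph) hS b b' hreach]
        exact hb.2)
      (by
        intro b hb hreach
        have : LbP n.toNat (safeP mm n graph) (n.toNat * n.toNat) b = LbP n.toNat (safeP mm n graph) (n.toNat * n.toNat) a :=
          (rep_const n.toNat (safeP mm n graph) hS a b hreach).symm
        omega)
      (n.toNat * n.toNat + 1) [((i : Int), (j : Int))] st.2 hsh
      (by
        intro e he
        rcases List.mem_singleton.1 he with rfl
        exact ⟨a, rfl, hsafe, reach_refl n.toNat (safeP mm n graph) _ a⟩)
      (by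
        intro b hb
        exact (hiff b).2 hb)
      (by
        intro b hb
        exact Or.inl ((hiff b).1 hb))
      (by
        intro b hb
        right
        intro b' hb'
        have hV0 := (hiff b).1 hb
        have hreach : reachP n.toNat (safeP mm n graph) (n.toNat * n.toNat) b b' = true :=
          reach_shorten n.toNat (safeP mm n graph) hS 1 b b'
            (reach_snoc n.toNat (safeP mm n graph) 0 b b b' (reach_refl n.toNat (safeP mm n graph) 0 b) hb')
        have hbS' : (safeP mm n graph) b' = true := by
          simp only [adjP, Bool.and_eq_true, decide_eq_true_eq] at hb'
          exact ((mem_nbrsP n.toNat (safeP mm n graph) b b').1 hb'.2).1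
        refine (hiff b').2 ⟨hbS', ?_⟩
        rw [← rep_const n.toNat (safeP mm n graph) hS b b' hreach]
        exact hV0.2)
      (Or.inl ⟨((i : Int), (j : Int)), List.mem_singleton.2 rfl, rfl⟩)
      (by
        have := compC_card_le n.toNat (safeP mm n graph) a
        have hc2 : ((compC n.toNat (safeP mm n graph) a) \ markF n.toNat st.2).card ≤ (compC n.toNat (safeP mm n graph) a).card :=
          Finset.card_le_card (Finset.sdiff_subset)
        simp only [List.length_singleton]
        omega)
    obtain ⟨hsh', hiff'⟩ := hgo
    refine ⟨hsh', ?_, ?_⟩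
    · intro b
      rw [hiff' b]
      constructor
      · rintro (hb | hb)
        · exact ⟨hb.1, by omega⟩
        · have hbS : (safeP mm n graph) b = true := by
            rcases reach_safe n.toNat (safeP mm n graph) (n.toNat * n.toNat) a b hb with rfl | ⟨-, h'⟩
            · exact hsafe
            · exact h'
          refine ⟨hbS, ?_⟩
          rw [rep_const n.toNat (safeP mm n graph) hS a b hb] at hrept
          omega
      · rintro ⟨hbS, hblt⟩
        rcases Nat.lt_or_ge (LbP n.toNat (safeP mm n graph) (n.toNat * n.toNat) b) t with hlt | hge
        · exact Or.inl ⟨hbS, hlt⟩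
        · have heq : LbP n.toNat (safeP mm n graph) (n.toNat * n.toNat) b = encP n.toNat a := by
            rw [← ht]; omega
          exact Or.inr (rep_cell_of_eq mm n graph a b hi hj hbS heq).1
    · show st.1 + 1 = _
      rw [hfiltT 0, hcnt, hdect.1, hdect.2]
      rw [if_pos (by
        rw [show ((a.1 : Nat), a.2) = a from rfl]
        simp only [Bool.and_eq_true, beq_iff_eq]
        exact ⟨hsafe, hrept⟩)]
  · rw [if_neg hcond]
    have hnotseed : ¬ ((safeP mm n graph) a = true ∧ LbP n.toNat (safeP mm n graph) (n.toNat * n.toNat) a = t) := by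
      rintro ⟨hsafe, hrept⟩
      apply hcond
      refine ⟨(region_zero_iff mm n graph i j hi hj).2 hsafe, ?_⟩
      cases hb : pvGetB st.2 i j
      · rfl
      · exfalso
        have h2 := ((hiff a).1 hb).2
        omega
    refine ⟨hsh, ?_, ?_⟩
    · intro b
      rw [hiff b]
      constructor
      · rintro ⟨hbS, hlt⟩
        exact ⟨hbS, by omega⟩
      · rintro ⟨hbS, hlt⟩
        refine ⟨hbS, ?_⟩
        rcases Nat.lt_or_ge (LbP n.toNat (safeP mm n graph) (n.toNat * n.toNat) b) t with hlt' | hge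
        · exact hlt'
        · exfalso
          have heq : LbP n.toNat (safeP mm n graph) (n.toNat * n.toNat) b = encP n.toNat a := by
            rw [← ht]; omega
          obtain ⟨-, hSa, hrepa⟩ := rep_cell_of_eq mm n graph a b hi hj hbS heq
          exact hnotseed ⟨hSa, by rw [hrepa, ht]⟩
    · rw [hcnt, hfiltT 0, hdect.1, hdect.2]
      rw [if_neg (by
        rw [show ((a.1 : Nat), a.2) = a from rfl]
        simp only [Bool.and_eq_true, beq_iff_eq]
        rintro ⟨h1, h2⟩
        exact hnotseed ⟨h1, h2⟩)]
      push_cast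
      ring

-- ===== row and column folds =====
theorem row_fold (mm n : Int) (graph : List (List Int)) (i : Nat) (hi : i < n.toNat) :
    ∀ (len s : Nat), s + len = n.toNat → ∀ st, AInvP mm n graph (encP n.toNat (i, s)) st →
    AInvP mm n graph (encP n.toNat (i, s + len))
      ((List.range' s len).foldl (fun st j =>
        if pvGetI (pvRegion mm n graph) i j = 0 ∧ pvGetB st.2 i j = false
        then (st.1 + 1, pvBfs n (pvRegion mm n graph) (n.toNat * n.toNat + 1)
              [((i : Int), (j : Int))] st.2)
        else st) st) := by
  intro len
  induction len with
  | zero =>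
    intro s hs st h
    simpa [List.range'_zero] using h
  | succ len ih =>
    intro s hs st h
    rw [List.range'_succ, List.foldl_cons]
    have hj : s < n.toNat := by omega
    have hstep := cell_step mm n graph i s hi hj st h
    have henc : encP n.toNat (i, s) + 1 = encP n.toNat (i, s + 1) := by
      show i * n.toNat + s + 1 = i * n.toNat + (s + 1)
      omega
    rw [henc] at hstep
    have := ih (s + 1) (by omega) _ hstep
    have harg : (s + 1) + len = s + (len + 1) := by omega
    rw [harg] at this
    exact this

theorem col_fold (mm n : Int) (graph : List (List Int)) :
    ∀ (len s : Nat), s + len = n.toNat → ∀ st,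
    AInvP mm n graph (encP n.toNat (s, 0)) st →
    AInvP mm n graph (encP n.toNat (s + len, 0))
      ((List.range' s len).foldl (fun st i => (List.range n.toNat).foldl (fun st j =>
        if pvGetI (pvRegion mm n graph) i j = 0 ∧ pvGetB st.2 i j = false
        then (st.1 + 1, pvBfs n (pvRegion mm n graph) (n.toNat * n.toNat + 1)
              [((i : Int), (j : Int))] st.2)
        else st) st) st) := by
  intro len
  induction len with
  | zero =>
    intro s hs st h
    simpa [List.range'_zero] using h
  | succ len ih =>
    intro s hs st h
    rw [List.range'_succ, List.foldl_cons]
    have hi : s < n.toNat := by omega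
    have hrow := row_fold mm n graph s hi n.toNat 0 (by omega) st (by
      have h0 : encP n.toNat (s, 0) = encP n.toNat (s, 0) := rfl
      exact h)
    rw [← List.range_eq_range'] at hrow
    have henc : encP n.toNat (s, 0 + n.toNat) = encP n.toNat (s + 1, 0) := by
      show s * n.toNat + (0 + n.toNat) = (s + 1) * n.toNat + 0
      rw [Nat.add_mul]
      omega
    rw [henc] at hrow
    have := ih (s + 1) (by omega) _ hrow
    have harg : (s + 1) + len = s + (len + 1) := by omega
    rw [harg] at this
    exact this

-- ===== A computes the same count =====
theorem raining_eq (mm n : Int) (graph : List (List Int)) :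
    raining mm n graph =
      (((List.range (n.toNat * n.toNat)).filter (fun p =>
        safeP mm n graph (p / n.toNat, p % n.toNat) &&
          (LbP n.toNat (safeP mm n graph) (n.toNat * n.toNat) (p / n.toNat, p % n.toNat) == p))).length
        : Int) := by
  have hinit : AInvP mm n graph (encP n.toNat (0, 0))
      ((0 : Int), List.replicate n.toNat (List.replicate n.toNat false)) := by
    refine ⟨shape_init n.toNat, ?_, ?_⟩
    · intro a
      rw [getB_init]
      constructor
      · intro h; cases h
      · rintro ⟨-, h⟩
        exact absurd h (by
          show ¬ _ < encP n.toNat (0, 0)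
          show ¬ _ < 0 * n.toNat + 0
          omega)
    · show (0 : Int) = _
      have : encP n.toNat (0, 0) = 0 := by
        show 0 * n.toNat + 0 = 0
        omega
      rw [this]
      simp
  have hfold := col_fold mm n graph n.toNat 0 (by omega) _ hinit
  have henc : encP n.toNat (0 + n.toNat, 0) = n.toNat * n.toNat := by
    show (0 + n.toNat) * n.toNat + 0 = n.toNat * n.toNat
    simp
  rw [henc] at hfold
  show ((List.range n.toNat).foldl (fun st i => (List.range n.toNat).foldl (fun st j =>
      if pvGetI (pvRegion mm n graph) i j = 0 ∧ pvGetB st.2 i j = false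
      then (st.1 + 1, pvBfs n (pvRegion mm n graph) (n.toNat * n.toNat + 1)
            [((i : Int), (j : Int))] st.2)
      else st) st) ((0 : Int), List.replicate n.toNat (List.replicate n.toNat false))).1 = _
  rw [← List.range_eq_range'] at hfold
  exact hfold.2.2

-- ===== the two ports agree =====
theorem raining_agree (mm n : Int) (graph : List (List Int)) :
    raining mm n graph = raining_alt mm n graph := by
  rw [raining_eq, raining_alt_eq]

-- ===== VERDICT (by name: the statement is the Claim_ definition above) =====
theorem raining_spec : Claim_equal_raining := by
  intro mm n graph _ _
  show raining mm n graph = raining_alt mm n graph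
  exact raining_agree mm n graph
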